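/- GENERATED by farm/worked/mk_tree_copies.py from farm/worked/maybe_start_packet/Proof.lean (a worked proof of the farm's unit `maybe_start_packet`,
   accepted by the verdict) — do not edit. -/
import Asan.CheckWalk
import Vorbis.Spec.ReaderLemmas
import Vorbis.Spec.Units.maybe_start_packet

open X86 X86.User Asan Vorbis

set_option maxRecDepth 4000
set_option maxHeartbeats 16000000

namespace Vorbis.Spec.Worked.maybe_start_packet
open Vorbis.Spec.maybe_start_packet (Statement)


/- The seven pure lemmas of this unit (`reader_through`, `reader_through_error`, `own_stores`, `mu_page_arm`, `widen`, `next_seg_kept`,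
   `reader_through_own`) are in the tree: Vorbis/Spec/ReaderLemmas.lean, namespace `Vorbis.Spec.MaybeStart`. -/
open Vorbis.Spec.MaybeStart

/-- THE EXIT JOIN `Vorbis.L.maybe_start_packet.cut1` (0x112f26, `add rsp, 8 ; pop rbx ; pop rbp ; ret`): from any state that
satisfies the exit invariant (the function's footprint so far, the three stack slots, `StartPacketPost`) to `Returned`. -/
theorem exit_join_w
    (Lay : Layout) (hLay : Lay.hi = 0x1000000) (μ : Microarch) (hμ : UserX.MicroOK μ) (u₀ : State)
    (hcode : HasCodeNat Lay u₀ Vorbis.L.maybe_start_packet.entry Vorbis.Code.code_maybe_start_packet.nat Vorbis.L.maybe_start_packet.size)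
    (hload4 : Asan.SmallCheck Lay μ Vorbis.WayInv (Vorbis.CodeOK u₀) [.rax, .rcx, .rdx] 4 Vorbis.L.__asan_load4_noabort.entry)
    (h_sp : ∀ (others : List Obj) (frames : List (Nat × FrameLayout)) (Blk : Block → Prop) (len : Nat),
      Calls Lay μ Vorbis.WayInv (Vorbis.conv u₀) Vorbis.L.start_packet.entry (Vorbis.Spec.start_packet.spec others frames Blk len))
    (h_get8 : ∀ (others : List Obj) (frames : List (Nat × FrameLayout)) (Blk : Block → Prop) (len : Nat),
      Calls Lay μ Vorbis.WayInv (Vorbis.conv u₀) Vorbis.L.get8.entry (Vorbis.Spec.get8.spec others frames Blk len))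
    (h_error : ∀ (others : List Obj) (frames : List (Nat × FrameLayout)),
      Calls Lay μ Vorbis.WayInv (Vorbis.conv u₀) Vorbis.L.error.entry (Vorbis.Spec.error.spec others frames))
    (h_spnc : ∀ (others : List Obj) (frames : List (Nat × FrameLayout)) (Blk : Block → Prop) (len : Nat),
      Calls Lay μ Vorbis.WayInv (Vorbis.conv u₀) Vorbis.L.start_page_no_capturepattern.entry
        (Vorbis.Spec.start_page_no_capturepattern.spec others frames Blk len))
    (hload1 : Asan.SmallCheck Lay μ Vorbis.WayInv (Vorbis.CodeOK u₀) [.rax, .rdx] 1 Vorbis.L.__asan_load1_noabort.entry)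
    (hstore4 : Asan.SmallCheck Lay μ Vorbis.WayInv (Vorbis.CodeOK u₀) [.rax, .rcx, .rdx] 4 Vorbis.L.__asan_store4_noabort.entry)
    (hstore1 : Asan.SmallCheck Lay μ Vorbis.WayInv (Vorbis.CodeOK u₀) [.rax, .rdx] 1 Vorbis.L.__asan_store1_noabort.entry)
    (others : List Obj) (frames : List (Nat × FrameLayout)) (Blk : Block → Prop) (len : Nat) (u : State) (ret : Word)
    (he : AtEntry (Vorbis.conv u₀) Vorbis.L.maybe_start_packet.entry (Vorbis.Spec.maybe_start_packet.spec others frames Blk len).frame ret u)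
    (hpre : (Vorbis.Spec.maybe_start_packet.spec others frames Blk len).pre u)
    (f : Nat) (hf : (u.reg .rdi).toNat = f) :
    ∀ s : State, s.rip = Vorbis.L.maybe_start_packet.cut1 → s.reg .rsp = u.reg .rsp - 24 →
      RegsKept [.rdi, .rbx, .rbp, .rsp, .rax, .rcx, .rdx, .rsi, .r8, .r9, .r10, .r11,
        .r16, .r17, .r18, .r19, .r20, .r21, .r22, .r23, .r24, .r25, .r26, .r27, .r28, .r29, .r30, .r31] u s →
      Mem.SameExcept [⟨(u.reg .rsp).toNat - 240, (u.reg .rsp).toNat⟩,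
        ⟨f + 48, f + 56⟩, ⟨f + 84, f + 96⟩, ⟨f + 136, f + 144⟩, ⟨f + 1484, f + 1749⟩, ⟨f + 1752, f + 1760⟩,
        ⟨f + 1768, f + 1784⟩] u.mem s.mem →
      ShadowUntouched u.mem s.mem →
      UInt64.ofNat (s.mem.readLE (u.reg .rsp) 8) = ret →
      UInt64.ofNat (s.mem.readLE (u.reg .rsp - 8) 8) = u.reg .rbp →
      UInt64.ofNat (s.mem.readLE (u.reg .rsp - 16) 8) = u.reg .rbx →
      s.flags.get .df = false → s.mxcsr &&& 8064 = 8064 →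
      Mem.EqOn Vorbis.L.textLo Vorbis.L.textHi u₀.mem s.mem →
      Vorbis.Spec.StartPacketPost Blk len f u s →
      ReachVia Lay μ WayInv s (Returned (conv u₀) (Vorbis.Spec.maybe_start_packet.spec others frames Blk len) u ret) := by
  have he0 := he
  v_entry he
  have hr : u.reg .rdi = addr f := eq_addr _ _ hf
  have hbits : Bits Blk len u.mem f := hf ▸ hpre.bits
  have hL : BlkLive Blk (Live (stackObjs frames ++ others)) := hpre.env.live
  have hobr := hbits.OBR
  simp only [voff] at hobr
  have hsp := hpre.shadow.rsp
  have hwhere := hpre.where_obj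
  rw [hf] at hwhere
  have hfa : (addr f).toNat = f := toNat_addr f (by omega)
  have hobj : LiveIn others frames f Off.sizeof.stb_vorbis := hf ▸ hpre.env.obj
  -- the callees' contracts, instantiated (the walker finds only hypotheses whose type is literally `Calls …`)
  have hsp' := h_sp others frames Blk len
  have hget8 := h_get8 others frames Blk len
  have herror := h_error others frames
  have hspnc := h_spnc others frames Blk len
  -- the precondition of a reader called from this frame (rsp = u.rsp − 32 at its entry)
  have mkpre : ∀ v : State, ShadowUntouched u.mem v.mem → v.reg .rsp = u.reg .rsp - 32 → v.reg .rdi = addr f →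
      Bits Blk len v.mem f → Vorbis.Spec.ReaderPre others frames Blk len v := by
    intro v hunv hrsp hrdi hb
    refine hpre.again (hpre.shadow.call hunv (by u_omega) (by u_omega) (by u_omega)) (hrdi.trans hr.symm) ?_
    rw [hf]
    exact hb
  -- THE EXIT JOIN 0x112f26 (`add rsp, 8 ; pop rbx ; pop rbp ; ret`), from any state that satisfies the exit invariant
  have hexit : ∀ s : State, s.rip = Vorbis.L.maybe_start_packet.cut1 → s.reg .rsp = u.reg .rsp - 24 →
      RegsKept [.rdi, .rbx, .rbp, .rsp, .rax, .rcx, .rdx, .rsi, .r8, .r9, .r10, .r11,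
        .r16, .r17, .r18, .r19, .r20, .r21, .r22, .r23, .r24, .r25, .r26, .r27, .r28, .r29, .r30, .r31] u s →
      Mem.SameExcept [⟨(u.reg .rsp).toNat - 240, (u.reg .rsp).toNat⟩,
        ⟨f + 48, f + 56⟩, ⟨f + 84, f + 96⟩, ⟨f + 136, f + 144⟩, ⟨f + 1484, f + 1749⟩, ⟨f + 1752, f + 1760⟩,
        ⟨f + 1768, f + 1784⟩] u.mem s.mem →
      ShadowUntouched u.mem s.mem →
      UInt64.ofNat (s.mem.readLE (u.reg .rsp) 8) = ret →
      UInt64.ofNat (s.mem.readLE (u.reg .rsp - 8) 8) = u.reg .rbp →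
      UInt64.ofNat (s.mem.readLE (u.reg .rsp - 16) 8) = u.reg .rbx →
      s.flags.get .df = false → s.mxcsr &&& 8064 = 8064 →
      Mem.EqOn Vorbis.L.textLo Vorbis.L.textHi u₀.mem s.mem →
      Vorbis.Spec.StartPacketPost Blk len f u s →
      ReachVia Lay μ WayInv s (Returned (conv u₀) (Vorbis.Spec.maybe_start_packet.spec others frames Blk len) u ret) := by
    intro s w_rip w_rsp w_kept hsame hun hs0 hs1 hs2 hdf hmx w_eq hpost
    obtain ⟨z, w_rax⟩ : ∃ z : Word, s.reg .rax = z := ⟨_, rfl⟩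
    have hz : s.reg .rax = z := w_rax
    u_walk hcode [hμ.vendor] span [Vorbis.L.textLo, Vorbis.L.textHi] side (v_side)
    refine ReachVia.done ?_
    v_returned
    · -- the postcondition (`v_returned` leaves the post first)
      show Vorbis.Spec.StartPacketPost Blk len (u.reg .rdi).toNat u s_112f2c
      rw [hf]
      refine ⟨?_, ?_, ?_, ?_⟩
      · rw [w_mem]
        exact hpost.untouched
      · rw [w_mem]
        exact hpost.reader
      · rw [w_rax, ← hz]
        exact hpost.result
      · rw [w_rax, ← hz, w_mem]
        exact hpost.started
  exact hexit

/-- THE JOIN `Vorbis.L.maybe_start_packet.join1` (`mov rdi, rbx ; call start_packet`): from any state that satisfies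
the invariant (`ReaderPost` against the entry) through `start_packet` to the exit join. -/
theorem start_join_w
    (Lay : Layout) (hLay : Lay.hi = 0x1000000) (μ : Microarch) (hμ : UserX.MicroOK μ) (u₀ : State)
    (hcode : HasCodeNat Lay u₀ Vorbis.L.maybe_start_packet.entry Vorbis.Code.code_maybe_start_packet.nat Vorbis.L.maybe_start_packet.size)
    (hload4 : Asan.SmallCheck Lay μ Vorbis.WayInv (Vorbis.CodeOK u₀) [.rax, .rcx, .rdx] 4 Vorbis.L.__asan_load4_noabort.entry)
    (h_sp : ∀ (others : List Obj) (frames : List (Nat × FrameLayout)) (Blk : Block → Prop) (len : Nat),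
      Calls Lay μ Vorbis.WayInv (Vorbis.conv u₀) Vorbis.L.start_packet.entry (Vorbis.Spec.start_packet.spec others frames Blk len))
    (h_get8 : ∀ (others : List Obj) (frames : List (Nat × FrameLayout)) (Blk : Block → Prop) (len : Nat),
      Calls Lay μ Vorbis.WayInv (Vorbis.conv u₀) Vorbis.L.get8.entry (Vorbis.Spec.get8.spec others frames Blk len))
    (h_error : ∀ (others : List Obj) (frames : List (Nat × FrameLayout)),
      Calls Lay μ Vorbis.WayInv (Vorbis.conv u₀) Vorbis.L.error.entry (Vorbis.Spec.error.spec others frames))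
    (h_spnc : ∀ (others : List Obj) (frames : List (Nat × FrameLayout)) (Blk : Block → Prop) (len : Nat),
      Calls Lay μ Vorbis.WayInv (Vorbis.conv u₀) Vorbis.L.start_page_no_capturepattern.entry
        (Vorbis.Spec.start_page_no_capturepattern.spec others frames Blk len))
    (hload1 : Asan.SmallCheck Lay μ Vorbis.WayInv (Vorbis.CodeOK u₀) [.rax, .rdx] 1 Vorbis.L.__asan_load1_noabort.entry)
    (hstore4 : Asan.SmallCheck Lay μ Vorbis.WayInv (Vorbis.CodeOK u₀) [.rax, .rcx, .rdx] 4 Vorbis.L.__asan_store4_noabort.entry)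
    (hstore1 : Asan.SmallCheck Lay μ Vorbis.WayInv (Vorbis.CodeOK u₀) [.rax, .rdx] 1 Vorbis.L.__asan_store1_noabort.entry)
    (others : List Obj) (frames : List (Nat × FrameLayout)) (Blk : Block → Prop) (len : Nat) (u : State) (ret : Word)
    (he : AtEntry (Vorbis.conv u₀) Vorbis.L.maybe_start_packet.entry (Vorbis.Spec.maybe_start_packet.spec others frames Blk len).frame ret u)
    (hpre : (Vorbis.Spec.maybe_start_packet.spec others frames Blk len).pre u)
    (f : Nat) (hf : (u.reg .rdi).toNat = f) :
    ∀ s : State, s.rip = Vorbis.L.maybe_start_packet.join1 → s.reg .rsp = u.reg .rsp - 24 → s.reg .rbx = addr f →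
      RegsKept [.rdi, .rbx, .rbp, .rsp, .rax, .rcx, .rdx, .rsi, .r8, .r9, .r10, .r11,
        .r16, .r17, .r18, .r19, .r20, .r21, .r22, .r23, .r24, .r25, .r26, .r27, .r28, .r29, .r30, .r31] u s →
      Mem.SameExcept [⟨(u.reg .rsp).toNat - 240, (u.reg .rsp).toNat⟩,
        ⟨f + 48, f + 56⟩, ⟨f + 84, f + 96⟩, ⟨f + 136, f + 144⟩, ⟨f + 1484, f + 1749⟩, ⟨f + 1752, f + 1760⟩,
        ⟨f + 1768, f + 1784⟩] u.mem s.mem →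
      ShadowUntouched u.mem s.mem →
      UInt64.ofNat (s.mem.readLE (u.reg .rsp) 8) = ret →
      UInt64.ofNat (s.mem.readLE (u.reg .rsp - 8) 8) = u.reg .rbp →
      UInt64.ofNat (s.mem.readLE (u.reg .rsp - 16) 8) = u.reg .rbx →
      s.flags.get .df = false → s.mxcsr &&& 8064 = 8064 →
      Mem.EqOn Vorbis.L.textLo Vorbis.L.textHi u₀.mem s.mem →
      ReaderPost Blk len u.mem s.mem f →
      ReachVia Lay μ WayInv s (Returned (conv u₀) (Vorbis.Spec.maybe_start_packet.spec others frames Blk len) u ret) := by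
  have he0 := he
  v_entry he
  have hr : u.reg .rdi = addr f := eq_addr _ _ hf
  have hbits : Bits Blk len u.mem f := hf ▸ hpre.bits
  have hL : BlkLive Blk (Live (stackObjs frames ++ others)) := hpre.env.live
  have hobr := hbits.OBR
  simp only [voff] at hobr
  have hsp := hpre.shadow.rsp
  have hwhere := hpre.where_obj
  rw [hf] at hwhere
  have hfa : (addr f).toNat = f := toNat_addr f (by omega)
  have hobj : LiveIn others frames f Off.sizeof.stb_vorbis := hf ▸ hpre.env.obj
  -- the callees' contracts, instantiated (the walker finds only hypotheses whose type is literally `Calls …`)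
  have hsp' := h_sp others frames Blk len
  have hget8 := h_get8 others frames Blk len
  have herror := h_error others frames
  have hspnc := h_spnc others frames Blk len
  -- the precondition of a reader called from this frame (rsp = u.rsp − 32 at its entry)
  have mkpre : ∀ v : State, ShadowUntouched u.mem v.mem → v.reg .rsp = u.reg .rsp - 32 → v.reg .rdi = addr f →
      Bits Blk len v.mem f → Vorbis.Spec.ReaderPre others frames Blk len v := by
    intro v hunv hrsp hrdi hb
    refine hpre.again (hpre.shadow.call hunv (by u_omega) (by u_omega) (by u_omega)) (hrdi.trans hr.symm) ?_
    rw [hf]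
    exact hb
  have hexit := Vorbis.Spec.Worked.maybe_start_packet.exit_join_w Lay hLay μ hμ u₀ hcode hload4 h_sp h_get8 h_error h_spnc hload1 hstore4 hstore1
      others frames Blk len u ret he0 hpre f hf
  -- THE JOIN Vorbis.L.maybe_start_packet.join1 (`mov rdi, rbx ; call start_packet`), from any state that satisfies the invariant
  have hstart : ∀ s : State, s.rip = Vorbis.L.maybe_start_packet.join1 → s.reg .rsp = u.reg .rsp - 24 → s.reg .rbx = addr f →
      RegsKept [.rdi, .rbx, .rbp, .rsp, .rax, .rcx, .rdx, .rsi, .r8, .r9, .r10, .r11,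
        .r16, .r17, .r18, .r19, .r20, .r21, .r22, .r23, .r24, .r25, .r26, .r27, .r28, .r29, .r30, .r31] u s →
      Mem.SameExcept [⟨(u.reg .rsp).toNat - 240, (u.reg .rsp).toNat⟩,
        ⟨f + 48, f + 56⟩, ⟨f + 84, f + 96⟩, ⟨f + 136, f + 144⟩, ⟨f + 1484, f + 1749⟩, ⟨f + 1752, f + 1760⟩,
        ⟨f + 1768, f + 1784⟩] u.mem s.mem →
      ShadowUntouched u.mem s.mem →
      UInt64.ofNat (s.mem.readLE (u.reg .rsp) 8) = ret →
      UInt64.ofNat (s.mem.readLE (u.reg .rsp - 8) 8) = u.reg .rbp →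
      UInt64.ofNat (s.mem.readLE (u.reg .rsp - 16) 8) = u.reg .rbx →
      s.flags.get .df = false → s.mxcsr &&& 8064 = 8064 →
      Mem.EqOn Vorbis.L.textLo Vorbis.L.textHi u₀.mem s.mem →
      ReaderPost Blk len u.mem s.mem f →
      ReachVia Lay μ WayInv s (Returned (conv u₀) (Vorbis.Spec.maybe_start_packet.spec others frames Blk len) u ret) := by
    intro s w_rip w_rsp w_rbx w_kept hsame hun hs0 hs1 hs2 hdf hmx w_eq hrp
    u_walk hcode [hμ.vendor] until [Vorbis.L.maybe_start_packet.cut1] span [Vorbis.L.textLo, Vorbis.L.textHi] side (v_side)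
    case call_inv =>
      refine Vorbis.abiInv_of ?_ ?_
      · rw [w_flags]
        exact hdf
      · rw [w_mxcsr]
        exact hmx
    case pre_112f21 =>
      have hun' : ShadowUntouched u.mem s_112f21.mem := by v_untouched
      have hk := Vorbis.Spec.Reader.store_off_obj hrp.bits (u.reg .rsp - 32) 8 1126182 (by u_omega) (by u_omega)
      rw [← w_mem] at hk
      exact mkpre _ hun' w_rsp w_rdi hk.1.bits
    -- 0x112f26, the state start_packet returned
    have hp := w_post
    have c_rdi := w_rdi_112f21
    have c_rsp := w_rsp_112f21
    have hpost : Vorbis.Spec.StartPacketPost Blk len (s_112f21.reg .rdi).toNat s_112f21 s_112f21r := hp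
    rw [c_rdi, hfa] at hpost
    have w_eq := Vorbis.conv_code_eqOn w_code
    simp only [X86.User.Spec.footprint, vspec, c_rsp, c_rdi, hfa] at w_same
    have hk := Vorbis.Spec.Reader.store_off_obj hrp.bits (u.reg .rsp - 32) 8 1126182 (by u_omega) (by u_omega)
    rw [← w_mem_112f21] at hk
    rw [w_mem_112f21] at w_same
    have hs0r : UInt64.ofNat (s_112f21r.mem.readLE (u.reg .rsp) 8) = ret := by u_frame hs0
    have hs1r : UInt64.ofNat (s_112f21r.mem.readLE (u.reg .rsp - 8) 8) = u.reg .rbp := by u_frame hs1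
    have hs2r : UInt64.ofNat (s_112f21r.mem.readLE (u.reg .rsp - 16) 8) = u.reg .rbx := by u_frame hs2
    have hunr : ShadowUntouched u.mem s_112f21r.mem := by v_untouched
    have hv : Mem.SameExcept [⟨(u.reg .rsp).toNat - 240, (u.reg .rsp).toNat⟩,
        ⟨f + 48, f + 56⟩, ⟨f + 84, f + 96⟩, ⟨f + 136, f + 144⟩, ⟨f + 1484, f + 1749⟩, ⟨f + 1752, f + 1760⟩,
        ⟨f + 1768, f + 1784⟩] u.mem (s.mem.writeLE (u.reg .rsp - 32) 8 1126182) := by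
      u_same
    have hsamer := Vorbis.Spec.Reader.sameExcept_through_callee hv w_same (by
      simp only [List.forall_mem_cons, List.not_mem_nil, false_imp_iff, implies_true, and_true, X86.User.inSpans_cons,
        X86.User.inSpans_nil, or_false]
      repeat' apply And.intro
      all_goals u_omega)
    have hdfr : s_112f21r.flags.get .df = false := (show X86.User.abiInv _ from w_inv).1
    have hmxr : s_112f21r.mxcsr &&& 8064 = 8064 := (show X86.User.abiInv _ from w_inv).2
    refine hexit s_112f21r w_rip w_rsp (w_kept.mono_all (by rfl)) hsamer hunr hs0r hs1r hs2r hdfr hmxr w_eq ?_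
    exact ⟨hunr, (hrp.trans hk.1).trans hpost.reader, hpost.result, hpost.started⟩
  exact hstart

/-- From the state `start_page_no_capturepattern` returned (`cut10`, 0x112fc1): failure → exit; no continued flag → the join of
`start_packet`; continued flag → `last_seg := 0`, `bytes_in_seg := 0`, `error(f, 32)`, exit. -/
theorem after_spnc_w
    (Lay : Layout) (hLay : Lay.hi = 0x1000000) (μ : Microarch) (hμ : UserX.MicroOK μ) (u₀ : State)
    (hcode : HasCodeNat Lay u₀ Vorbis.L.maybe_start_packet.entry Vorbis.Code.code_maybe_start_packet.nat Vorbis.L.maybe_start_packet.size)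
    (hload4 : Asan.SmallCheck Lay μ Vorbis.WayInv (Vorbis.CodeOK u₀) [.rax, .rcx, .rdx] 4 Vorbis.L.__asan_load4_noabort.entry)
    (h_sp : ∀ (others : List Obj) (frames : List (Nat × FrameLayout)) (Blk : Block → Prop) (len : Nat),
      Calls Lay μ Vorbis.WayInv (Vorbis.conv u₀) Vorbis.L.start_packet.entry (Vorbis.Spec.start_packet.spec others frames Blk len))
    (h_get8 : ∀ (others : List Obj) (frames : List (Nat × FrameLayout)) (Blk : Block → Prop) (len : Nat),
      Calls Lay μ Vorbis.WayInv (Vorbis.conv u₀) Vorbis.L.get8.entry (Vorbis.Spec.get8.spec others frames Blk len))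
    (h_error : ∀ (others : List Obj) (frames : List (Nat × FrameLayout)),
      Calls Lay μ Vorbis.WayInv (Vorbis.conv u₀) Vorbis.L.error.entry (Vorbis.Spec.error.spec others frames))
    (h_spnc : ∀ (others : List Obj) (frames : List (Nat × FrameLayout)) (Blk : Block → Prop) (len : Nat),
      Calls Lay μ Vorbis.WayInv (Vorbis.conv u₀) Vorbis.L.start_page_no_capturepattern.entry
        (Vorbis.Spec.start_page_no_capturepattern.spec others frames Blk len))
    (hload1 : Asan.SmallCheck Lay μ Vorbis.WayInv (Vorbis.CodeOK u₀) [.rax, .rdx] 1 Vorbis.L.__asan_load1_noabort.entry)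
    (hstore4 : Asan.SmallCheck Lay μ Vorbis.WayInv (Vorbis.CodeOK u₀) [.rax, .rcx, .rdx] 4 Vorbis.L.__asan_store4_noabort.entry)
    (hstore1 : Asan.SmallCheck Lay μ Vorbis.WayInv (Vorbis.CodeOK u₀) [.rax, .rdx] 1 Vorbis.L.__asan_store1_noabort.entry)
    (others : List Obj) (frames : List (Nat × FrameLayout)) (Blk : Block → Prop) (len : Nat) (u : State) (ret : Word)
    (he : AtEntry (Vorbis.conv u₀) Vorbis.L.maybe_start_packet.entry (Vorbis.Spec.maybe_start_packet.spec others frames Blk len).frame ret u)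
    (hpre : (Vorbis.Spec.maybe_start_packet.spec others frames Blk len).pre u)
    (f : Nat) (hf : (u.reg .rdi).toNat = f)
    (s_112fbcr : State) (z5 : Word)
    (w_rip : s_112fbcr.rip = Vorbis.L.maybe_start_packet.cut10) (w_rsp : s_112fbcr.reg .rsp = u.reg .rsp - 24)
    (w_rbx : s_112fbcr.reg .rbx = addr f)
    (w_kept : RegsKept [.rdi, .rbx, .rbp, .rsp, .rax, .rcx, .rdx, .rsi, .r8, .r9, .r10, .r11,
        .r16, .r17, .r18, .r19, .r20, .r21, .r22, .r23, .r24, .r25, .r26, .r27, .r28, .r29, .r30, .r31] u s_112fbcr)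
    (w_eq : Mem.EqOn Vorbis.L.textLo Vorbis.L.textHi u₀.mem s_112fbcr.mem)
    (hs0_112fbcr : UInt64.ofNat (s_112fbcr.mem.readLE (u.reg .rsp) 8) = ret)
    (hs1_112fbcr : UInt64.ofNat (s_112fbcr.mem.readLE (u.reg .rsp - 8) 8) = u.reg .rbp)
    (hs2_112fbcr : UInt64.ofNat (s_112fbcr.mem.readLE (u.reg .rsp - 16) 8) = u.reg .rbx)
    (hun_112fbcr : ShadowUntouched u.mem s_112fbcr.mem)
    (hsame_112fbcr : Mem.SameExcept [⟨(u.reg .rsp).toNat - 240, (u.reg .rsp).toNat⟩,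
        ⟨f + 48, f + 56⟩, ⟨f + 84, f + 96⟩, ⟨f + 136, f + 144⟩, ⟨f + 1484, f + 1749⟩, ⟨f + 1752, f + 1760⟩,
        ⟨f + 1768, f + 1784⟩]
        u.mem s_112fbcr.mem)
    (hdf_112fbcr : s_112fbcr.flags.get .df = false) (hmx_112fbcr : s_112fbcr.mxcsr &&& 8064 = 8064)
    (hb_112fbcr : Bits Blk len s_112fbcr.mem f) (hmu_112fbcr : mu s_112fbcr.mem f ≤ mu u.mem f)
    (w_rax : s_112fbcr.reg .rax = z5)
    (hres5 : z5 = 0 ∨ z5 = 1)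
    : ReachVia Lay μ WayInv s_112fbcr (Returned (conv u₀) (Vorbis.Spec.maybe_start_packet.spec others frames Blk len) u ret) := by
  have he0 := he
  v_entry he
  have hr : u.reg .rdi = addr f := eq_addr _ _ hf
  have hbits : Bits Blk len u.mem f := hf ▸ hpre.bits
  have hL : BlkLive Blk (Live (stackObjs frames ++ others)) := hpre.env.live
  have hobr := hbits.OBR
  simp only [voff] at hobr
  have hsp := hpre.shadow.rsp
  have hwhere := hpre.where_obj
  rw [hf] at hwhere
  have hfa : (addr f).toNat = f := toNat_addr f (by omega)
  have hobj : LiveIn others frames f Off.sizeof.stb_vorbis := hf ▸ hpre.env.obj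
  -- the callees' contracts, instantiated (the walker finds only hypotheses whose type is literally `Calls …`)
  have hsp' := h_sp others frames Blk len
  have hget8 := h_get8 others frames Blk len
  have herror := h_error others frames
  have hspnc := h_spnc others frames Blk len
  -- the precondition of a reader called from this frame (rsp = u.rsp − 32 at its entry)
  have mkpre : ∀ v : State, ShadowUntouched u.mem v.mem → v.reg .rsp = u.reg .rsp - 32 → v.reg .rdi = addr f →
      Bits Blk len v.mem f → Vorbis.Spec.ReaderPre others frames Blk len v := by
    intro v hunv hrsp hrdi hb
    refine hpre.again (hpre.shadow.call hunv (by u_omega) (by u_omega) (by u_omega)) (hrdi.trans hr.symm) ?_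
    rw [hf]
    exact hb
  have hexit := Vorbis.Spec.Worked.maybe_start_packet.exit_join_w Lay hLay μ hμ u₀ hcode hload4 h_sp h_get8 h_error h_spnc hload1 hstore4 hstore1
      others frames Blk len u ret he0 hpre f hf
  have hstart := Vorbis.Spec.Worked.maybe_start_packet.start_join_w Lay hLay μ hμ u₀ hcode hload4 h_sp h_get8 h_error h_spnc hload1 hstore4 hstore1
      others frames Blk len u ret he0 hpre f hf
  have hz5 : s_112fbcr.reg .rax = z5 := w_rax
  u_walk hcode [hμ.vendor] until [Vorbis.L.maybe_start_packet.cut1, Vorbis.L.maybe_start_packet.join1] span [Vorbis.L.textLo, Vorbis.L.textHi] side (v_side)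
  case check_112fd0 =>
    have hun : ShadowUntouched u.mem s_112fd0.mem := by v_untouched
    exact Vorbis.Spec.check_site hpre.shadow.inv hun (hbits.site_field hL 1747 1 (by omega) (by omega) rfl) (by u_omega)
  case check_112fe9 =>
    have hun : ShadowUntouched u.mem s_112fe9.mem := by v_untouched
    exact Vorbis.Spec.check_site hpre.shadow.inv hun (hbits.site_field hL 1756 4 (by omega) (by omega) rfl) (by u_omega)
  case check_112fff =>
    have hun : ShadowUntouched u.mem s_112fff.mem := by v_untouched
    exact Vorbis.Spec.check_site hpre.shadow.inv hun (hbits.site_field hL 1748 1 (by omega) (by omega) rfl) (by u_omega)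
  case call_inv =>
    refine Vorbis.abiInv_of ?_ ?_
    · rw [w_flags]
      first
      | exact w_df_112fff
      | (simp only [X86.User.df_setStatus]; exact w_df_112fff)
    · rw [w_mxcsr]
      exact hmx_112fbcr
  case pre_113013 =>
    have hun' : ShadowUntouched u.mem s_113013.mem := by v_untouched
    refine ⟨hpre.shadow.call hun' (by u_omega) (by u_omega) (by u_omega), ?_⟩
    rw [w_rdi, hfa]
    exact hobj
  · -- 0x112fc3: start_page_no_capturepattern failed, return 0
    have hsame_112fc3 : Mem.SameExcept [⟨(u.reg .rsp).toNat - 240, (u.reg .rsp).toNat⟩,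
          ⟨f + 48, f + 56⟩, ⟨f + 84, f + 96⟩, ⟨f + 136, f + 144⟩, ⟨f + 1484, f + 1749⟩, ⟨f + 1752, f + 1760⟩,
          ⟨f + 1768, f + 1784⟩]
        u.mem s_112fc3.mem := by
      rw [w_mem]
      u_same
    have hw_112fc3 : Mem.SameExcept [⟨(u.reg .rsp).toNat - 240, (u.reg .rsp).toNat⟩] s_112fbcr.mem s_112fc3.mem := by
      rw [w_mem]
      u_same
    have hk_112fc3 := Vorbis.Spec.Reader.reader_of_window hb_112fbcr hw_112fc3 (by u_omega)
    have hun_112fc3 : ShadowUntouched u.mem s_112fc3.mem := by v_untouched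
    have hs0_112fc3 : UInt64.ofNat (s_112fc3.mem.readLE (u.reg .rsp) 8) = ret := by u_frame hs0_112fbcr
    have hs1_112fc3 : UInt64.ofNat (s_112fc3.mem.readLE (u.reg .rsp - 8) 8) = u.reg .rbp := by u_frame hs1_112fbcr
    have hs2_112fc3 : UInt64.ofNat (s_112fc3.mem.readLE (u.reg .rsp - 16) 8) = u.reg .rbx := by u_frame hs2_112fbcr
    have hdf_112fc3 : s_112fc3.flags.get .df = false := by
      rw [w_flags]
      simp only [X86.User.df_setStatus]
      exact hdf_112fbcr
    have hmx_112fc3 : s_112fc3.mxcsr &&& 8064 = 8064 := by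
      rw [w_mxcsr]
      exact hmx_112fbcr
    have hmu_112fc3 : mu s_112fc3.mem f ≤ mu u.mem f := by
      rw [hk_112fc3.2]
      exact hmu_112fbcr
    refine hexit s_112fc3 w_rip w_rsp (w_kept.mono_all (by rfl)) hsame_112fc3 hun_112fc3 hs0_112fc3 hs1_112fc3 hs2_112fc3
      hdf_112fc3 hmx_112fc3 w_eq ⟨hun_112fc3, ⟨hk_112fc3.1, hmu_112fc3⟩, ?_, ?_⟩
    · rw [w_rax]
      exact hres5
    · intro h
      exfalso
      rw [w_rax] at h
      rw [h] at hbr_112fc3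
      exact absurd hbr_112fc3 (by decide)
  · -- 0x112fdc: no continued flag: on to start_packet (the join Vorbis.L.maybe_start_packet.join1)
    have hsame_112fdc : Mem.SameExcept [⟨(u.reg .rsp).toNat - 240, (u.reg .rsp).toNat⟩,
          ⟨f + 48, f + 56⟩, ⟨f + 84, f + 96⟩, ⟨f + 136, f + 144⟩, ⟨f + 1484, f + 1749⟩, ⟨f + 1752, f + 1760⟩,
          ⟨f + 1768, f + 1784⟩]
        u.mem s_112fdc.mem := by
      rw [w_mem]
      u_same
    have hw_112fdc : Mem.SameExcept [⟨(u.reg .rsp).toNat - 240, (u.reg .rsp).toNat⟩] s_112fbcr.mem s_112fdc.mem := by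
      rw [w_mem]
      u_same
    have hk_112fdc := Vorbis.Spec.Reader.reader_of_window hb_112fbcr hw_112fdc (by u_omega)
    have hun_112fdc : ShadowUntouched u.mem s_112fdc.mem := by v_untouched
    have hs0_112fdc : UInt64.ofNat (s_112fdc.mem.readLE (u.reg .rsp) 8) = ret := by u_frame hs0_112fbcr
    have hs1_112fdc : UInt64.ofNat (s_112fdc.mem.readLE (u.reg .rsp - 8) 8) = u.reg .rbp := by u_frame hs1_112fbcr
    have hs2_112fdc : UInt64.ofNat (s_112fdc.mem.readLE (u.reg .rsp - 16) 8) = u.reg .rbx := by u_frame hs2_112fbcr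
    have hdf_112fdc : s_112fdc.flags.get .df = false := by
      rw [w_flags]
      simp only [X86.User.df_setStatus]
      exact w_df_112fd0
    have hmx_112fdc : s_112fdc.mxcsr &&& 8064 = 8064 := by
      rw [w_mxcsr]
      exact hmx_112fbcr
    have hmu_112fdc : mu s_112fdc.mem f ≤ mu u.mem f := by
      rw [hk_112fdc.2]
      exact hmu_112fbcr
    exact hstart s_112fdc w_rip w_rsp w_rbx (w_kept.mono_all (by rfl)) hsame_112fdc hun_112fdc hs0_112fdc hs1_112fdc hs2_112fdc
      hdf_112fdc hmx_112fdc w_eq ⟨hk_112fdc.1, hmu_112fdc⟩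
  · -- the continued flag: last_seg := 0, bytes_in_seg := 0, error(f, 32) returned
    have hp := w_post
    have c_rdi := w_rdi_113013
    have c_rsp := w_rsp_113013
    have hpost := hp
    have w_eq := Vorbis.conv_code_eqOn w_code
    simp only [X86.User.Spec.footprint, vspec, c_rsp, c_rdi, hfa] at w_same
    have hw_113013 : Mem.SameExcept [⟨(u.reg .rsp).toNat - 240, (u.reg .rsp).toNat⟩, ⟨f + 1748, f + 1749⟩, ⟨f + 1756, f + 1760⟩]
        s_112fbcr.mem s_113013.mem := by
      rw [w_mem_113013]
      u_same
    have hz_113013 : stb_vorbis.bytes_in_seg s_113013.mem f = 0 := by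
      have ea : addr f + 1748 = addr (f + 1748) := by simp only [vfield]
      simp only [vacc, voff]
      rw [w_mem_113013, Mem.u8_writeLE _ _ _ _ _ (by u_omega) (by omega) (by u_omega), ea, Mem.u8_writeLE_same]
    have hk_113013 := Vorbis.Spec.MaybeStart.reader_through_own hb_112fbcr hw_113013 (by u_omega) hz_113013
    have hke_113013 := Vorbis.Spec.MaybeStart.reader_through_error hk_113013.1 w_same (by u_omega)
    rw [w_mem_113013] at w_same
    have hs0_113013r : UInt64.ofNat (s_113013r.mem.readLE (u.reg .rsp) 8) = ret := by u_frame hs0_112fbcr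
    have hs1_113013r : UInt64.ofNat (s_113013r.mem.readLE (u.reg .rsp - 8) 8) = u.reg .rbp := by u_frame hs1_112fbcr
    have hs2_113013r : UInt64.ofNat (s_113013r.mem.readLE (u.reg .rsp - 16) 8) = u.reg .rbx := by u_frame hs2_112fbcr
    have hun_113013r : ShadowUntouched u.mem s_113013r.mem := by v_untouched
    rw [← w_mem_113013] at w_same
    have hv_113013 : Mem.SameExcept [⟨(u.reg .rsp).toNat - 240, (u.reg .rsp).toNat⟩,
          ⟨f + 48, f + 56⟩, ⟨f + 84, f + 96⟩, ⟨f + 136, f + 144⟩, ⟨f + 1484, f + 1749⟩, ⟨f + 1752, f + 1760⟩,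
          ⟨f + 1768, f + 1784⟩]
        u.mem s_113013.mem := by
      rw [w_mem_113013]
      u_same
    have hsame_113013r := Vorbis.Spec.Reader.sameExcept_through_callee hv_113013 w_same (by
      simp only [List.forall_mem_cons, List.not_mem_nil, false_imp_iff, implies_true, and_true, X86.User.inSpans_cons,
        X86.User.inSpans_nil, or_false]
      repeat' apply And.intro
      all_goals u_omega)
    have hdf_113013r : s_113013r.flags.get .df = false := (show X86.User.abiInv _ from w_inv).1
    have hmx_113013r : s_113013r.mxcsr &&& 8064 = 8064 := (show X86.User.abiInv _ from w_inv).2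
    clear w_same hv_113013
    have w_rax : s_113013r.reg .rax = 0 := hpost.1
    have hb_113013r : Bits Blk len s_113013r.mem f := hke_113013.1
    have hmu_113013r : mu s_113013r.mem f ≤ mu u.mem f := by
      have := hk_113013.2
      rw [hke_113013.2]
      omega
    u_walk hcode [hμ.vendor] until [Vorbis.L.maybe_start_packet.cut1, Vorbis.L.maybe_start_packet.join1] span [Vorbis.L.textLo, Vorbis.L.textHi] side (v_side)
    have hsame_113018 : Mem.SameExcept [⟨(u.reg .rsp).toNat - 240, (u.reg .rsp).toNat⟩,
          ⟨f + 48, f + 56⟩, ⟨f + 84, f + 96⟩, ⟨f + 136, f + 144⟩, ⟨f + 1484, f + 1749⟩, ⟨f + 1752, f + 1760⟩,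
          ⟨f + 1768, f + 1784⟩]
        u.mem s_113018.mem := by
      rw [w_mem]
      u_same
    have hw_113018 : Mem.SameExcept [⟨(u.reg .rsp).toNat - 240, (u.reg .rsp).toNat⟩] s_113013r.mem s_113018.mem := by
      rw [w_mem]
      u_same
    have hk_113018 := Vorbis.Spec.Reader.reader_of_window hb_113013r hw_113018 (by u_omega)
    have hun_113018 : ShadowUntouched u.mem s_113018.mem := by v_untouched
    have hs0_113018 : UInt64.ofNat (s_113018.mem.readLE (u.reg .rsp) 8) = ret := by u_frame hs0_113013r
    have hs1_113018 : UInt64.ofNat (s_113018.mem.readLE (u.reg .rsp - 8) 8) = u.reg .rbp := by u_frame hs1_113013r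
    have hs2_113018 : UInt64.ofNat (s_113018.mem.readLE (u.reg .rsp - 16) 8) = u.reg .rbx := by u_frame hs2_113013r
    have hdf_113018 : s_113018.flags.get .df = false := by
      rw [w_flags]
      exact hdf_113013r
    have hmx_113018 : s_113018.mxcsr &&& 8064 = 8064 := by
      rw [w_mxcsr]
      exact hmx_113013r
    have hmu_113018 : mu s_113018.mem f ≤ mu u.mem f := by
      rw [hk_113018.2]
      exact hmu_113013r
    refine hexit s_113018 w_rip w_rsp (w_kept.mono_all (by rfl)) hsame_113018 hun_113018 hs0_113018 hs1_113018 hs2_113018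
      hdf_113018 hmx_113018 w_eq ⟨hun_113018, ⟨hk_113018.1, hmu_113018⟩, ?_, ?_⟩
    · exact Or.inl w_rax
    · intro h
      rw [w_rax] at h
      exact absurd h (by decide)

/-- From the state the get8 number 4 of the capture pattern returned (`cut8`): the byte does not match → `error(f, 30)`, exit;
it matches → the next callee, whose returned state is handed to `after_spnc_w`. `hadv`: a non-zero byte was really read, so μ is
4 × 65536 below the entry's. -/
theorem after_get8_4_w
    (Lay : Layout) (hLay : Lay.hi = 0x1000000) (μ : Microarch) (hμ : UserX.MicroOK μ) (u₀ : State)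
    (hcode : HasCodeNat Lay u₀ Vorbis.L.maybe_start_packet.entry Vorbis.Code.code_maybe_start_packet.nat Vorbis.L.maybe_start_packet.size)
    (hload4 : Asan.SmallCheck Lay μ Vorbis.WayInv (Vorbis.CodeOK u₀) [.rax, .rcx, .rdx] 4 Vorbis.L.__asan_load4_noabort.entry)
    (h_sp : ∀ (others : List Obj) (frames : List (Nat × FrameLayout)) (Blk : Block → Prop) (len : Nat),
      Calls Lay μ Vorbis.WayInv (Vorbis.conv u₀) Vorbis.L.start_packet.entry (Vorbis.Spec.start_packet.spec others frames Blk len))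
    (h_get8 : ∀ (others : List Obj) (frames : List (Nat × FrameLayout)) (Blk : Block → Prop) (len : Nat),
      Calls Lay μ Vorbis.WayInv (Vorbis.conv u₀) Vorbis.L.get8.entry (Vorbis.Spec.get8.spec others frames Blk len))
    (h_error : ∀ (others : List Obj) (frames : List (Nat × FrameLayout)),
      Calls Lay μ Vorbis.WayInv (Vorbis.conv u₀) Vorbis.L.error.entry (Vorbis.Spec.error.spec others frames))
    (h_spnc : ∀ (others : List Obj) (frames : List (Nat × FrameLayout)) (Blk : Block → Prop) (len : Nat),
      Calls Lay μ Vorbis.WayInv (Vorbis.conv u₀) Vorbis.L.start_page_no_capturepattern.entry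
        (Vorbis.Spec.start_page_no_capturepattern.spec others frames Blk len))
    (hload1 : Asan.SmallCheck Lay μ Vorbis.WayInv (Vorbis.CodeOK u₀) [.rax, .rdx] 1 Vorbis.L.__asan_load1_noabort.entry)
    (hstore4 : Asan.SmallCheck Lay μ Vorbis.WayInv (Vorbis.CodeOK u₀) [.rax, .rcx, .rdx] 4 Vorbis.L.__asan_store4_noabort.entry)
    (hstore1 : Asan.SmallCheck Lay μ Vorbis.WayInv (Vorbis.CodeOK u₀) [.rax, .rdx] 1 Vorbis.L.__asan_store1_noabort.entry)
    (others : List Obj) (frames : List (Nat × FrameLayout)) (Blk : Block → Prop) (len : Nat) (u : State) (ret : Word)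
    (he : AtEntry (Vorbis.conv u₀) Vorbis.L.maybe_start_packet.entry (Vorbis.Spec.maybe_start_packet.spec others frames Blk len).frame ret u)
    (hpre : (Vorbis.Spec.maybe_start_packet.spec others frames Blk len).pre u)
    (f : Nat) (hf : (u.reg .rdi).toNat = f)
    (s_112f9er : State) (z4 : Word)
    (w_rip : s_112f9er.rip = Vorbis.L.maybe_start_packet.cut8) (w_rsp : s_112f9er.reg .rsp = u.reg .rsp - 24)
    (w_rbx : s_112f9er.reg .rbx = addr f)
    (w_kept : RegsKept [.rdi, .rbx, .rbp, .rsp, .rax, .rcx, .rdx, .rsi, .r8, .r9, .r10, .r11,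
        .r16, .r17, .r18, .r19, .r20, .r21, .r22, .r23, .r24, .r25, .r26, .r27, .r28, .r29, .r30, .r31] u s_112f9er)
    (w_eq : Mem.EqOn Vorbis.L.textLo Vorbis.L.textHi u₀.mem s_112f9er.mem)
    (hs0_112f9er : UInt64.ofNat (s_112f9er.mem.readLE (u.reg .rsp) 8) = ret)
    (hs1_112f9er : UInt64.ofNat (s_112f9er.mem.readLE (u.reg .rsp - 8) 8) = u.reg .rbp)
    (hs2_112f9er : UInt64.ofNat (s_112f9er.mem.readLE (u.reg .rsp - 16) 8) = u.reg .rbx)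
    (hun_112f9er : ShadowUntouched u.mem s_112f9er.mem)
    (hsame_112f9er : Mem.SameExcept [⟨(u.reg .rsp).toNat - 240, (u.reg .rsp).toNat⟩, ⟨f + 48, f + 56⟩, ⟨f + 136, f + 144⟩]
        u.mem s_112f9er.mem)
    (hdf_112f9er : s_112f9er.flags.get .df = false) (hmx_112f9er : s_112f9er.mxcsr &&& 8064 = 8064)
    (hb_112f9er : Bits Blk len s_112f9er.mem f) (hmu_112f9er : mu s_112f9er.mem f ≤ mu u.mem f)
    (w_rax : s_112f9er.reg .rax = z4)
    (hns : stb_vorbis.next_seg u.mem f = -1)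
    (hadv : z4 ≠ 0 → mu s_112f9er.mem f + 65536 * 4 ≤ mu u.mem f)
    : ReachVia Lay μ WayInv s_112f9er (Returned (conv u₀) (Vorbis.Spec.maybe_start_packet.spec others frames Blk len) u ret) := by
  have he0 := he
  v_entry he
  have hr : u.reg .rdi = addr f := eq_addr _ _ hf
  have hbits : Bits Blk len u.mem f := hf ▸ hpre.bits
  have hL : BlkLive Blk (Live (stackObjs frames ++ others)) := hpre.env.live
  have hobr := hbits.OBR
  simp only [voff] at hobr
  have hsp := hpre.shadow.rsp
  have hwhere := hpre.where_obj
  rw [hf] at hwhere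
  have hfa : (addr f).toNat = f := toNat_addr f (by omega)
  have hobj : LiveIn others frames f Off.sizeof.stb_vorbis := hf ▸ hpre.env.obj
  -- the callees' contracts, instantiated (the walker finds only hypotheses whose type is literally `Calls …`)
  have hsp' := h_sp others frames Blk len
  have hget8 := h_get8 others frames Blk len
  have herror := h_error others frames
  have hspnc := h_spnc others frames Blk len
  -- the precondition of a reader called from this frame (rsp = u.rsp − 32 at its entry)
  have mkpre : ∀ v : State, ShadowUntouched u.mem v.mem → v.reg .rsp = u.reg .rsp - 32 → v.reg .rdi = addr f →
      Bits Blk len v.mem f → Vorbis.Spec.ReaderPre others frames Blk len v := by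
    intro v hunv hrsp hrdi hb
    refine hpre.again (hpre.shadow.call hunv (by u_omega) (by u_omega) (by u_omega)) (hrdi.trans hr.symm) ?_
    rw [hf]
    exact hb
  have hexit := Vorbis.Spec.Worked.maybe_start_packet.exit_join_w Lay hLay μ hμ u₀ hcode hload4 h_sp h_get8 h_error h_spnc hload1 hstore4 hstore1
      others frames Blk len u ret he0 hpre f hf
  have hz4 : s_112f9er.reg .rax = z4 := w_rax
  u_walk hcode [hμ.vendor] until [Vorbis.L.maybe_start_packet.cut1, Vorbis.L.maybe_start_packet.join1] span [Vorbis.L.textLo, Vorbis.L.textHi] side (v_side)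
  case call_inv =>
    refine Vorbis.abiInv_of ?_ ?_
    · rw [w_flags]
      first
      | exact hdf_112f9er
      | (simp only [X86.User.df_setStatus]; exact hdf_112f9er)
    · rw [w_mxcsr]
      exact hmx_112f9er
  case pre_112fbc =>
    have hun' : ShadowUntouched u.mem s_112fbc.mem := by v_untouched
    have hw : Mem.SameExcept [⟨(u.reg .rsp).toNat - 240, (u.reg .rsp).toNat⟩] s_112f9er.mem s_112fbc.mem := by
      rw [w_mem]
      u_same
    have hk := Vorbis.Spec.Reader.reader_of_window hb_112f9er hw (by u_omega)
    have hsn : Mem.SameExcept [⟨(u.reg .rsp).toNat - 240, (u.reg .rsp).toNat⟩, ⟨f + 48, f + 56⟩, ⟨f + 136, f + 144⟩]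
        u.mem s_112fbc.mem := by
      rw [w_mem]
      u_same
    have hbnd : Vorbis.Spec.AtPageBoundary s_112fbc.mem (s_112fbc.reg .rdi).toNat := by
      rw [w_rdi, hfa]
      left
      rw [Vorbis.Spec.MaybeStart.next_seg_kept (by omega) hsn (by u_omega)]
      exact hns
    exact ⟨mkpre _ hun' w_rsp w_rdi hk.1, hbnd⟩
  case call_inv =>
    refine Vorbis.abiInv_of ?_ ?_
    · rw [w_flags]
      first
      | exact hdf_112f9er
      | (simp only [X86.User.df_setStatus]; exact hdf_112f9er)
    · rw [w_mxcsr]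
      exact hmx_112f9er
  case pre_112faf =>
    have hun' : ShadowUntouched u.mem s_112faf.mem := by v_untouched
    refine ⟨hpre.shadow.call hun' (by u_omega) (by u_omega) (by u_omega), ?_⟩
    rw [w_rdi, hfa]
    exact hobj
  · -- the byte matched: the next call returned
    have hne4 : z4 ≠ 0 := by
      intro h
      rw [h] at hbr_112fa5
      exact absurd hbr_112fa5 (by decide)
    have hadv4 := hadv hne4
    have hp := w_post
    have c_rdi := w_rdi_112fbc
    have c_rsp := w_rsp_112fbc
    have hpost : Vorbis.Spec.PageNoCapturePost Blk len (s_112fbc.reg .rdi).toNat s_112fbc s_112fbcr := hp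
    have w_eq := Vorbis.conv_code_eqOn w_code
    simp only [X86.User.Spec.footprint, vspec, c_rsp, c_rdi, hfa] at w_same
    have hw_112fbc : Mem.SameExcept [⟨(u.reg .rsp).toNat - 240, (u.reg .rsp).toNat⟩] s_112f9er.mem s_112fbc.mem := by
      rw [w_mem_112fbc]
      u_same
    have hk_112fbc := Vorbis.Spec.Reader.reader_of_window hb_112f9er hw_112fbc (by u_omega)
    rw [w_mem_112fbc] at w_same
    have hs0_112fbcr : UInt64.ofNat (s_112fbcr.mem.readLE (u.reg .rsp) 8) = ret := by u_frame hs0_112f9er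
    have hs1_112fbcr : UInt64.ofNat (s_112fbcr.mem.readLE (u.reg .rsp - 8) 8) = u.reg .rbp := by u_frame hs1_112f9er
    have hs2_112fbcr : UInt64.ofNat (s_112fbcr.mem.readLE (u.reg .rsp - 16) 8) = u.reg .rbx := by u_frame hs2_112f9er
    have hun_112fbcr : ShadowUntouched u.mem s_112fbcr.mem := by v_untouched
    rw [← w_mem_112fbc] at w_same
    have hvn_112fbc : Mem.SameExcept [⟨(u.reg .rsp).toNat - 240, (u.reg .rsp).toNat⟩, ⟨f + 48, f + 56⟩, ⟨f + 136, f + 144⟩]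
        u.mem s_112fbc.mem := by
      rw [w_mem_112fbc]
      u_same
    have hv_112fbc := Vorbis.Spec.MaybeStart.widen hvn_112fbc
    clear hvn_112fbc
    have hsame_112fbcr := Vorbis.Spec.Reader.sameExcept_through_callee hv_112fbc w_same (by
      simp only [List.forall_mem_cons, List.not_mem_nil, false_imp_iff, implies_true, and_true, X86.User.inSpans_cons,
        X86.User.inSpans_nil, or_false]
      repeat' apply And.intro
      all_goals u_omega)
    have hdf_112fbcr : s_112fbcr.flags.get .df = false := (show X86.User.abiInv _ from w_inv).1
    have hmx_112fbcr : s_112fbcr.mxcsr &&& 8064 = 8064 := (show X86.User.abiInv _ from w_inv).2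
    clear w_same hv_112fbc
    rw [c_rdi, hfa] at hpost
    obtain ⟨z5, w_rax⟩ : ∃ z : Word, s_112fbcr.reg .rax = z := ⟨_, rfl⟩
    have hz5 : s_112fbcr.reg .rax = z5 := w_rax
    have hb_112fbcr : Bits Blk len s_112fbcr.mem f := hpost.bits
    have hres5 : z5 = 0 ∨ z5 = 1 := by
      rw [← hz5]
      exact hpost.result
    have hmu_112fbcr : mu s_112fbcr.mem f ≤ mu u.mem f := by
      have hbd := hpost.bound
      rw [hk_112fbc.2] at hbd
      omega
    exact Vorbis.Spec.Worked.maybe_start_packet.after_spnc_w Lay hLay μ hμ u₀ hcode hload4 h_sp h_get8 h_error h_spnc hload1 hstore4 hstore1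
      others frames Blk len u ret he0 hpre f hf
      s_112fbcr z5 w_rip w_rsp w_rbx (w_kept.mono_all (by rfl)) w_eq
      hs0_112fbcr hs1_112fbcr hs2_112fbcr hun_112fbcr hsame_112fbcr hdf_112fbcr hmx_112fbcr hb_112fbcr hmu_112fbcr w_rax hres5
  · -- the byte did not match: error(f, 30) returned
    have hp := w_post
    have c_rdi := w_rdi_112faf
    have c_rsp := w_rsp_112faf
    have hpost := hp
    have w_eq := Vorbis.conv_code_eqOn w_code
    simp only [X86.User.Spec.footprint, vspec, c_rsp, c_rdi, hfa] at w_same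
    have hw_112faf : Mem.SameExcept [⟨(u.reg .rsp).toNat - 240, (u.reg .rsp).toNat⟩] s_112f9er.mem s_112faf.mem := by
      rw [w_mem_112faf]
      u_same
    have hk_112faf := Vorbis.Spec.Reader.reader_of_window hb_112f9er hw_112faf (by u_omega)
    have hke_112faf := Vorbis.Spec.MaybeStart.reader_through_error hk_112faf.1 w_same (by u_omega)
    rw [w_mem_112faf] at w_same
    have hs0_112fafr : UInt64.ofNat (s_112fafr.mem.readLE (u.reg .rsp) 8) = ret := by u_frame hs0_112f9er
    have hs1_112fafr : UInt64.ofNat (s_112fafr.mem.readLE (u.reg .rsp - 8) 8) = u.reg .rbp := by u_frame hs1_112f9er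
    have hs2_112fafr : UInt64.ofNat (s_112fafr.mem.readLE (u.reg .rsp - 16) 8) = u.reg .rbx := by u_frame hs2_112f9er
    have hun_112fafr : ShadowUntouched u.mem s_112fafr.mem := by v_untouched
    rw [← w_mem_112faf] at w_same
    have hv_112faf : Mem.SameExcept [⟨(u.reg .rsp).toNat - 240, (u.reg .rsp).toNat⟩, ⟨f + 48, f + 56⟩, ⟨f + 136, f + 144⟩]
        u.mem s_112faf.mem := by
      rw [w_mem_112faf]
      u_same
    have hsame_112fafr := Vorbis.Spec.Reader.sameExcept_through_callee hv_112faf w_same (by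
      simp only [List.forall_mem_cons, List.not_mem_nil, false_imp_iff, implies_true, and_true, X86.User.inSpans_cons,
        X86.User.inSpans_nil, or_false]
      repeat' apply And.intro
      all_goals u_omega)
    have hdf_112fafr : s_112fafr.flags.get .df = false := (show X86.User.abiInv _ from w_inv).1
    have hmx_112fafr : s_112fafr.mxcsr &&& 8064 = 8064 := (show X86.User.abiInv _ from w_inv).2
    clear w_same hv_112faf
    have w_rax : s_112fafr.reg .rax = 0 := hpost.1
    have hb_112fafr : Bits Blk len s_112fafr.mem f := hke_112faf.1
    have hmu_112fafr : mu s_112fafr.mem f ≤ mu u.mem f := by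
      rw [hke_112faf.2, hk_112faf.2]
      exact hmu_112f9er
    u_walk hcode [hμ.vendor] until [Vorbis.L.maybe_start_packet.cut1, Vorbis.L.maybe_start_packet.join1] span [Vorbis.L.textLo, Vorbis.L.textHi] side (v_side)
    have hsame_112fb4 : Mem.SameExcept [⟨(u.reg .rsp).toNat - 240, (u.reg .rsp).toNat⟩, ⟨f + 48, f + 56⟩, ⟨f + 136, f + 144⟩]
        u.mem s_112fb4.mem := by
      rw [w_mem]
      u_same
    have hw_112fb4 : Mem.SameExcept [⟨(u.reg .rsp).toNat - 240, (u.reg .rsp).toNat⟩] s_112fafr.mem s_112fb4.mem := by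
      rw [w_mem]
      u_same
    have hk_112fb4 := Vorbis.Spec.Reader.reader_of_window hb_112fafr hw_112fb4 (by u_omega)
    have hun_112fb4 : ShadowUntouched u.mem s_112fb4.mem := by v_untouched
    have hs0_112fb4 : UInt64.ofNat (s_112fb4.mem.readLE (u.reg .rsp) 8) = ret := by u_frame hs0_112fafr
    have hs1_112fb4 : UInt64.ofNat (s_112fb4.mem.readLE (u.reg .rsp - 8) 8) = u.reg .rbp := by u_frame hs1_112fafr
    have hs2_112fb4 : UInt64.ofNat (s_112fb4.mem.readLE (u.reg .rsp - 16) 8) = u.reg .rbx := by u_frame hs2_112fafr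
    have hdf_112fb4 : s_112fb4.flags.get .df = false := by
      rw [w_flags]
      first
        | exact hdf_112fafr
        | (simp only [X86.User.df_setStatus]; exact hdf_112fafr)
    have hmx_112fb4 : s_112fb4.mxcsr &&& 8064 = 8064 := by
      rw [w_mxcsr]
      exact hmx_112fafr
    have hmu_112fb4 : mu s_112fb4.mem f ≤ mu u.mem f := by
      rw [hk_112fb4.2]
      exact hmu_112fafr
    refine hexit s_112fb4 w_rip w_rsp (w_kept.mono_all (by rfl)) (Vorbis.Spec.MaybeStart.widen hsame_112fb4) hun_112fb4 hs0_112fb4 hs1_112fb4 hs2_112fb4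
      hdf_112fb4 hmx_112fb4 w_eq ⟨hun_112fb4, ⟨hk_112fb4.1, hmu_112fb4⟩, ?_, ?_⟩
    · exact Or.inl w_rax
    · intro h
      rw [w_rax] at h
      exact absurd h (by decide)

/-- From the state the get8 number 3 of the capture pattern returned (`cut6`): the byte does not match → `error(f, 30)`, exit;
it matches → the next callee, whose returned state is handed to `after_get8_4_w`. `hadv`: a non-zero byte was really read, so μ is
3 × 65536 below the entry's. -/
theorem after_get8_3_w
    (Lay : Layout) (hLay : Lay.hi = 0x1000000) (μ : Microarch) (hμ : UserX.MicroOK μ) (u₀ : State)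
    (hcode : HasCodeNat Lay u₀ Vorbis.L.maybe_start_packet.entry Vorbis.Code.code_maybe_start_packet.nat Vorbis.L.maybe_start_packet.size)
    (hload4 : Asan.SmallCheck Lay μ Vorbis.WayInv (Vorbis.CodeOK u₀) [.rax, .rcx, .rdx] 4 Vorbis.L.__asan_load4_noabort.entry)
    (h_sp : ∀ (others : List Obj) (frames : List (Nat × FrameLayout)) (Blk : Block → Prop) (len : Nat),
      Calls Lay μ Vorbis.WayInv (Vorbis.conv u₀) Vorbis.L.start_packet.entry (Vorbis.Spec.start_packet.spec others frames Blk len))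
    (h_get8 : ∀ (others : List Obj) (frames : List (Nat × FrameLayout)) (Blk : Block → Prop) (len : Nat),
      Calls Lay μ Vorbis.WayInv (Vorbis.conv u₀) Vorbis.L.get8.entry (Vorbis.Spec.get8.spec others frames Blk len))
    (h_error : ∀ (others : List Obj) (frames : List (Nat × FrameLayout)),
      Calls Lay μ Vorbis.WayInv (Vorbis.conv u₀) Vorbis.L.error.entry (Vorbis.Spec.error.spec others frames))
    (h_spnc : ∀ (others : List Obj) (frames : List (Nat × FrameLayout)) (Blk : Block → Prop) (len : Nat),
      Calls Lay μ Vorbis.WayInv (Vorbis.conv u₀) Vorbis.L.start_page_no_capturepattern.entry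
        (Vorbis.Spec.start_page_no_capturepattern.spec others frames Blk len))
    (hload1 : Asan.SmallCheck Lay μ Vorbis.WayInv (Vorbis.CodeOK u₀) [.rax, .rdx] 1 Vorbis.L.__asan_load1_noabort.entry)
    (hstore4 : Asan.SmallCheck Lay μ Vorbis.WayInv (Vorbis.CodeOK u₀) [.rax, .rcx, .rdx] 4 Vorbis.L.__asan_store4_noabort.entry)
    (hstore1 : Asan.SmallCheck Lay μ Vorbis.WayInv (Vorbis.CodeOK u₀) [.rax, .rdx] 1 Vorbis.L.__asan_store1_noabort.entry)
    (others : List Obj) (frames : List (Nat × FrameLayout)) (Blk : Block → Prop) (len : Nat) (u : State) (ret : Word)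
    (he : AtEntry (Vorbis.conv u₀) Vorbis.L.maybe_start_packet.entry (Vorbis.Spec.maybe_start_packet.spec others frames Blk len).frame ret u)
    (hpre : (Vorbis.Spec.maybe_start_packet.spec others frames Blk len).pre u)
    (f : Nat) (hf : (u.reg .rdi).toNat = f)
    (s_112f83r : State) (z3 : Word)
    (w_rip : s_112f83r.rip = Vorbis.L.maybe_start_packet.cut6) (w_rsp : s_112f83r.reg .rsp = u.reg .rsp - 24)
    (w_rbx : s_112f83r.reg .rbx = addr f)
    (w_kept : RegsKept [.rdi, .rbx, .rbp, .rsp, .rax, .rcx, .rdx, .rsi, .r8, .r9, .r10, .r11,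
        .r16, .r17, .r18, .r19, .r20, .r21, .r22, .r23, .r24, .r25, .r26, .r27, .r28, .r29, .r30, .r31] u s_112f83r)
    (w_eq : Mem.EqOn Vorbis.L.textLo Vorbis.L.textHi u₀.mem s_112f83r.mem)
    (hs0_112f83r : UInt64.ofNat (s_112f83r.mem.readLE (u.reg .rsp) 8) = ret)
    (hs1_112f83r : UInt64.ofNat (s_112f83r.mem.readLE (u.reg .rsp - 8) 8) = u.reg .rbp)
    (hs2_112f83r : UInt64.ofNat (s_112f83r.mem.readLE (u.reg .rsp - 16) 8) = u.reg .rbx)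
    (hun_112f83r : ShadowUntouched u.mem s_112f83r.mem)
    (hsame_112f83r : Mem.SameExcept [⟨(u.reg .rsp).toNat - 240, (u.reg .rsp).toNat⟩, ⟨f + 48, f + 56⟩, ⟨f + 136, f + 144⟩]
        u.mem s_112f83r.mem)
    (hdf_112f83r : s_112f83r.flags.get .df = false) (hmx_112f83r : s_112f83r.mxcsr &&& 8064 = 8064)
    (hb_112f83r : Bits Blk len s_112f83r.mem f) (hmu_112f83r : mu s_112f83r.mem f ≤ mu u.mem f)
    (w_rax : s_112f83r.reg .rax = z3)
    (hns : stb_vorbis.next_seg u.mem f = -1)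
    (hadv : z3 ≠ 0 → mu s_112f83r.mem f + 65536 * 3 ≤ mu u.mem f)
    : ReachVia Lay μ WayInv s_112f83r (Returned (conv u₀) (Vorbis.Spec.maybe_start_packet.spec others frames Blk len) u ret) := by
  have he0 := he
  v_entry he
  have hr : u.reg .rdi = addr f := eq_addr _ _ hf
  have hbits : Bits Blk len u.mem f := hf ▸ hpre.bits
  have hL : BlkLive Blk (Live (stackObjs frames ++ others)) := hpre.env.live
  have hobr := hbits.OBR
  simp only [voff] at hobr
  have hsp := hpre.shadow.rsp
  have hwhere := hpre.where_obj
  rw [hf] at hwhere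
  have hfa : (addr f).toNat = f := toNat_addr f (by omega)
  have hobj : LiveIn others frames f Off.sizeof.stb_vorbis := hf ▸ hpre.env.obj
  -- the callees' contracts, instantiated (the walker finds only hypotheses whose type is literally `Calls …`)
  have hsp' := h_sp others frames Blk len
  have hget8 := h_get8 others frames Blk len
  have herror := h_error others frames
  have hspnc := h_spnc others frames Blk len
  -- the precondition of a reader called from this frame (rsp = u.rsp − 32 at its entry)
  have mkpre : ∀ v : State, ShadowUntouched u.mem v.mem → v.reg .rsp = u.reg .rsp - 32 → v.reg .rdi = addr f →
      Bits Blk len v.mem f → Vorbis.Spec.ReaderPre others frames Blk len v := by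
    intro v hunv hrsp hrdi hb
    refine hpre.again (hpre.shadow.call hunv (by u_omega) (by u_omega) (by u_omega)) (hrdi.trans hr.symm) ?_
    rw [hf]
    exact hb
  have hexit := Vorbis.Spec.Worked.maybe_start_packet.exit_join_w Lay hLay μ hμ u₀ hcode hload4 h_sp h_get8 h_error h_spnc hload1 hstore4 hstore1
      others frames Blk len u ret he0 hpre f hf
  have hz3 : s_112f83r.reg .rax = z3 := w_rax
  u_walk hcode [hμ.vendor] until [Vorbis.L.maybe_start_packet.cut1, Vorbis.L.maybe_start_packet.join1] span [Vorbis.L.textLo, Vorbis.L.textHi] side (v_side)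
  case call_inv =>
    refine Vorbis.abiInv_of ?_ ?_
    · rw [w_flags]
      first
      | exact hdf_112f83r
      | (simp only [X86.User.df_setStatus]; exact hdf_112f83r)
    · rw [w_mxcsr]
      exact hmx_112f83r
  case pre_112f9e =>
    have hun' : ShadowUntouched u.mem s_112f9e.mem := by v_untouched
    have hw : Mem.SameExcept [⟨(u.reg .rsp).toNat - 240, (u.reg .rsp).toNat⟩] s_112f83r.mem s_112f9e.mem := by
      rw [w_mem]
      u_same
    have hk := Vorbis.Spec.Reader.reader_of_window hb_112f83r hw (by u_omega)
    exact mkpre _ hun' w_rsp w_rdi hk.1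
  case call_inv =>
    refine Vorbis.abiInv_of ?_ ?_
    · rw [w_flags]
      first
      | exact hdf_112f83r
      | (simp only [X86.User.df_setStatus]; exact hdf_112f83r)
    · rw [w_mxcsr]
      exact hmx_112f83r
  case pre_112f94 =>
    have hun' : ShadowUntouched u.mem s_112f94.mem := by v_untouched
    refine ⟨hpre.shadow.call hun' (by u_omega) (by u_omega) (by u_omega), ?_⟩
    rw [w_rdi, hfa]
    exact hobj
  · -- the byte matched: the next call returned
    have hne3 : z3 ≠ 0 := by
      intro h
      rw [h] at hbr_112f8a
      exact absurd hbr_112f8a (by decide)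
    have hadv3 := hadv hne3
    have hp := w_post
    have c_rdi := w_rdi_112f9e
    have c_rsp := w_rsp_112f9e
    have hpost : Vorbis.Spec.Get8Post Blk len (s_112f9e.reg .rdi).toNat s_112f9e s_112f9er := hp
    have w_eq := Vorbis.conv_code_eqOn w_code
    simp only [X86.User.Spec.footprint, vspec, c_rsp, c_rdi, hfa] at w_same
    have hw_112f9e : Mem.SameExcept [⟨(u.reg .rsp).toNat - 240, (u.reg .rsp).toNat⟩] s_112f83r.mem s_112f9e.mem := by
      rw [w_mem_112f9e]
      u_same
    have hk_112f9e := Vorbis.Spec.Reader.reader_of_window hb_112f83r hw_112f9e (by u_omega)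
    rw [w_mem_112f9e] at w_same
    have hs0_112f9er : UInt64.ofNat (s_112f9er.mem.readLE (u.reg .rsp) 8) = ret := by u_frame hs0_112f83r
    have hs1_112f9er : UInt64.ofNat (s_112f9er.mem.readLE (u.reg .rsp - 8) 8) = u.reg .rbp := by u_frame hs1_112f83r
    have hs2_112f9er : UInt64.ofNat (s_112f9er.mem.readLE (u.reg .rsp - 16) 8) = u.reg .rbx := by u_frame hs2_112f83r
    have hun_112f9er : ShadowUntouched u.mem s_112f9er.mem := by v_untouched
    rw [← w_mem_112f9e] at w_same
    have hv_112f9e : Mem.SameExcept [⟨(u.reg .rsp).toNat - 240, (u.reg .rsp).toNat⟩, ⟨f + 48, f + 56⟩, ⟨f + 136, f + 144⟩]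
        u.mem s_112f9e.mem := by
      rw [w_mem_112f9e]
      u_same
    have hsame_112f9er := Vorbis.Spec.Reader.sameExcept_through_callee hv_112f9e w_same (by
      simp only [List.forall_mem_cons, List.not_mem_nil, false_imp_iff, implies_true, and_true, X86.User.inSpans_cons,
        X86.User.inSpans_nil, or_false]
      repeat' apply And.intro
      all_goals u_omega)
    have hdf_112f9er : s_112f9er.flags.get .df = false := (show X86.User.abiInv _ from w_inv).1
    have hmx_112f9er : s_112f9er.mxcsr &&& 8064 = 8064 := (show X86.User.abiInv _ from w_inv).2
    clear w_same hv_112f9e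
    rw [c_rdi, hfa] at hpost
    have hg_112f9e := hpost
    clear hpost hp
    obtain ⟨z4, w_rax⟩ : ∃ z : Word, s_112f9er.reg .rax = z := ⟨_, rfl⟩
    have hz4 : s_112f9er.reg .rax = z4 := w_rax
    have hb_112f9er : Bits Blk len s_112f9er.mem f := hg_112f9e.reader.bits
    have hmu_112f9er : mu s_112f9er.mem f ≤ mu u.mem f := by
      have := hg_112f9e.reader.mu_le
      rw [hk_112f9e.2] at this
      omega
    have hadv_next : z4 ≠ 0 → mu s_112f9er.mem f + 65536 * 4 ≤ mu u.mem f := by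
      intro hne
      have h := (hg_112f9e.adv (by rw [hz4]; exact hne)).2
      rw [hk_112f9e.2] at h
      omega
    exact Vorbis.Spec.Worked.maybe_start_packet.after_get8_4_w Lay hLay μ hμ u₀ hcode hload4 h_sp h_get8 h_error h_spnc hload1 hstore4 hstore1
      others frames Blk len u ret he0 hpre f hf
      s_112f9er z4 w_rip w_rsp w_rbx (w_kept.mono_all (by rfl)) w_eq
      hs0_112f9er hs1_112f9er hs2_112f9er hun_112f9er hsame_112f9er hdf_112f9er hmx_112f9er hb_112f9er hmu_112f9er w_rax hns hadv_next
  · -- the byte did not match: error(f, 30) returned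
    have hp := w_post
    have c_rdi := w_rdi_112f94
    have c_rsp := w_rsp_112f94
    have hpost := hp
    have w_eq := Vorbis.conv_code_eqOn w_code
    simp only [X86.User.Spec.footprint, vspec, c_rsp, c_rdi, hfa] at w_same
    have hw_112f94 : Mem.SameExcept [⟨(u.reg .rsp).toNat - 240, (u.reg .rsp).toNat⟩] s_112f83r.mem s_112f94.mem := by
      rw [w_mem_112f94]
      u_same
    have hk_112f94 := Vorbis.Spec.Reader.reader_of_window hb_112f83r hw_112f94 (by u_omega)
    have hke_112f94 := Vorbis.Spec.MaybeStart.reader_through_error hk_112f94.1 w_same (by u_omega)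
    rw [w_mem_112f94] at w_same
    have hs0_112f94r : UInt64.ofNat (s_112f94r.mem.readLE (u.reg .rsp) 8) = ret := by u_frame hs0_112f83r
    have hs1_112f94r : UInt64.ofNat (s_112f94r.mem.readLE (u.reg .rsp - 8) 8) = u.reg .rbp := by u_frame hs1_112f83r
    have hs2_112f94r : UInt64.ofNat (s_112f94r.mem.readLE (u.reg .rsp - 16) 8) = u.reg .rbx := by u_frame hs2_112f83r
    have hun_112f94r : ShadowUntouched u.mem s_112f94r.mem := by v_untouched
    rw [← w_mem_112f94] at w_same
    have hv_112f94 : Mem.SameExcept [⟨(u.reg .rsp).toNat - 240, (u.reg .rsp).toNat⟩, ⟨f + 48, f + 56⟩, ⟨f + 136, f + 144⟩]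
        u.mem s_112f94.mem := by
      rw [w_mem_112f94]
      u_same
    have hsame_112f94r := Vorbis.Spec.Reader.sameExcept_through_callee hv_112f94 w_same (by
      simp only [List.forall_mem_cons, List.not_mem_nil, false_imp_iff, implies_true, and_true, X86.User.inSpans_cons,
        X86.User.inSpans_nil, or_false]
      repeat' apply And.intro
      all_goals u_omega)
    have hdf_112f94r : s_112f94r.flags.get .df = false := (show X86.User.abiInv _ from w_inv).1
    have hmx_112f94r : s_112f94r.mxcsr &&& 8064 = 8064 := (show X86.User.abiInv _ from w_inv).2
    clear w_same hv_112f94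
    have w_rax : s_112f94r.reg .rax = 0 := hpost.1
    have hb_112f94r : Bits Blk len s_112f94r.mem f := hke_112f94.1
    have hmu_112f94r : mu s_112f94r.mem f ≤ mu u.mem f := by
      rw [hke_112f94.2, hk_112f94.2]
      exact hmu_112f83r
    u_walk hcode [hμ.vendor] until [Vorbis.L.maybe_start_packet.cut1, Vorbis.L.maybe_start_packet.join1] span [Vorbis.L.textLo, Vorbis.L.textHi] side (v_side)
    have hsame_112f99 : Mem.SameExcept [⟨(u.reg .rsp).toNat - 240, (u.reg .rsp).toNat⟩, ⟨f + 48, f + 56⟩, ⟨f + 136, f + 144⟩]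
        u.mem s_112f99.mem := by
      rw [w_mem]
      u_same
    have hw_112f99 : Mem.SameExcept [⟨(u.reg .rsp).toNat - 240, (u.reg .rsp).toNat⟩] s_112f94r.mem s_112f99.mem := by
      rw [w_mem]
      u_same
    have hk_112f99 := Vorbis.Spec.Reader.reader_of_window hb_112f94r hw_112f99 (by u_omega)
    have hun_112f99 : ShadowUntouched u.mem s_112f99.mem := by v_untouched
    have hs0_112f99 : UInt64.ofNat (s_112f99.mem.readLE (u.reg .rsp) 8) = ret := by u_frame hs0_112f94r
    have hs1_112f99 : UInt64.ofNat (s_112f99.mem.readLE (u.reg .rsp - 8) 8) = u.reg .rbp := by u_frame hs1_112f94r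
    have hs2_112f99 : UInt64.ofNat (s_112f99.mem.readLE (u.reg .rsp - 16) 8) = u.reg .rbx := by u_frame hs2_112f94r
    have hdf_112f99 : s_112f99.flags.get .df = false := by
      rw [w_flags]
      first
        | exact hdf_112f94r
        | (simp only [X86.User.df_setStatus]; exact hdf_112f94r)
    have hmx_112f99 : s_112f99.mxcsr &&& 8064 = 8064 := by
      rw [w_mxcsr]
      exact hmx_112f94r
    have hmu_112f99 : mu s_112f99.mem f ≤ mu u.mem f := by
      rw [hk_112f99.2]
      exact hmu_112f94r
    refine hexit s_112f99 w_rip w_rsp (w_kept.mono_all (by rfl)) (Vorbis.Spec.MaybeStart.widen hsame_112f99) hun_112f99 hs0_112f99 hs1_112f99 hs2_112f99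
      hdf_112f99 hmx_112f99 w_eq ⟨hun_112f99, ⟨hk_112f99.1, hmu_112f99⟩, ?_, ?_⟩
    · exact Or.inl w_rax
    · intro h
      rw [w_rax] at h
      exact absurd h (by decide)

/-- From the state the get8 number 2 of the capture pattern returned (`cut4`): the byte does not match → `error(f, 30)`, exit;
it matches → the next callee, whose returned state is handed to `after_get8_3_w`. `hadv`: a non-zero byte was really read, so μ is
2 × 65536 below the entry's. -/
theorem after_get8_2_w
    (Lay : Layout) (hLay : Lay.hi = 0x1000000) (μ : Microarch) (hμ : UserX.MicroOK μ) (u₀ : State)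
    (hcode : HasCodeNat Lay u₀ Vorbis.L.maybe_start_packet.entry Vorbis.Code.code_maybe_start_packet.nat Vorbis.L.maybe_start_packet.size)
    (hload4 : Asan.SmallCheck Lay μ Vorbis.WayInv (Vorbis.CodeOK u₀) [.rax, .rcx, .rdx] 4 Vorbis.L.__asan_load4_noabort.entry)
    (h_sp : ∀ (others : List Obj) (frames : List (Nat × FrameLayout)) (Blk : Block → Prop) (len : Nat),
      Calls Lay μ Vorbis.WayInv (Vorbis.conv u₀) Vorbis.L.start_packet.entry (Vorbis.Spec.start_packet.spec others frames Blk len))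
    (h_get8 : ∀ (others : List Obj) (frames : List (Nat × FrameLayout)) (Blk : Block → Prop) (len : Nat),
      Calls Lay μ Vorbis.WayInv (Vorbis.conv u₀) Vorbis.L.get8.entry (Vorbis.Spec.get8.spec others frames Blk len))
    (h_error : ∀ (others : List Obj) (frames : List (Nat × FrameLayout)),
      Calls Lay μ Vorbis.WayInv (Vorbis.conv u₀) Vorbis.L.error.entry (Vorbis.Spec.error.spec others frames))
    (h_spnc : ∀ (others : List Obj) (frames : List (Nat × FrameLayout)) (Blk : Block → Prop) (len : Nat),
      Calls Lay μ Vorbis.WayInv (Vorbis.conv u₀) Vorbis.L.start_page_no_capturepattern.entry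
        (Vorbis.Spec.start_page_no_capturepattern.spec others frames Blk len))
    (hload1 : Asan.SmallCheck Lay μ Vorbis.WayInv (Vorbis.CodeOK u₀) [.rax, .rdx] 1 Vorbis.L.__asan_load1_noabort.entry)
    (hstore4 : Asan.SmallCheck Lay μ Vorbis.WayInv (Vorbis.CodeOK u₀) [.rax, .rcx, .rdx] 4 Vorbis.L.__asan_store4_noabort.entry)
    (hstore1 : Asan.SmallCheck Lay μ Vorbis.WayInv (Vorbis.CodeOK u₀) [.rax, .rdx] 1 Vorbis.L.__asan_store1_noabort.entry)
    (others : List Obj) (frames : List (Nat × FrameLayout)) (Blk : Block → Prop) (len : Nat) (u : State) (ret : Word)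
    (he : AtEntry (Vorbis.conv u₀) Vorbis.L.maybe_start_packet.entry (Vorbis.Spec.maybe_start_packet.spec others frames Blk len).frame ret u)
    (hpre : (Vorbis.Spec.maybe_start_packet.spec others frames Blk len).pre u)
    (f : Nat) (hf : (u.reg .rdi).toNat = f)
    (s_112f68r : State) (z2 : Word)
    (w_rip : s_112f68r.rip = Vorbis.L.maybe_start_packet.cut4) (w_rsp : s_112f68r.reg .rsp = u.reg .rsp - 24)
    (w_rbx : s_112f68r.reg .rbx = addr f)
    (w_kept : RegsKept [.rdi, .rbx, .rbp, .rsp, .rax, .rcx, .rdx, .rsi, .r8, .r9, .r10, .r11,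
        .r16, .r17, .r18, .r19, .r20, .r21, .r22, .r23, .r24, .r25, .r26, .r27, .r28, .r29, .r30, .r31] u s_112f68r)
    (w_eq : Mem.EqOn Vorbis.L.textLo Vorbis.L.textHi u₀.mem s_112f68r.mem)
    (hs0_112f68r : UInt64.ofNat (s_112f68r.mem.readLE (u.reg .rsp) 8) = ret)
    (hs1_112f68r : UInt64.ofNat (s_112f68r.mem.readLE (u.reg .rsp - 8) 8) = u.reg .rbp)
    (hs2_112f68r : UInt64.ofNat (s_112f68r.mem.readLE (u.reg .rsp - 16) 8) = u.reg .rbx)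
    (hun_112f68r : ShadowUntouched u.mem s_112f68r.mem)
    (hsame_112f68r : Mem.SameExcept [⟨(u.reg .rsp).toNat - 240, (u.reg .rsp).toNat⟩, ⟨f + 48, f + 56⟩, ⟨f + 136, f + 144⟩]
        u.mem s_112f68r.mem)
    (hdf_112f68r : s_112f68r.flags.get .df = false) (hmx_112f68r : s_112f68r.mxcsr &&& 8064 = 8064)
    (hb_112f68r : Bits Blk len s_112f68r.mem f) (hmu_112f68r : mu s_112f68r.mem f ≤ mu u.mem f)
    (w_rax : s_112f68r.reg .rax = z2)
    (hns : stb_vorbis.next_seg u.mem f = -1)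
    (hadv : z2 ≠ 0 → mu s_112f68r.mem f + 65536 * 2 ≤ mu u.mem f)
    : ReachVia Lay μ WayInv s_112f68r (Returned (conv u₀) (Vorbis.Spec.maybe_start_packet.spec others frames Blk len) u ret) := by
  have he0 := he
  v_entry he
  have hr : u.reg .rdi = addr f := eq_addr _ _ hf
  have hbits : Bits Blk len u.mem f := hf ▸ hpre.bits
  have hL : BlkLive Blk (Live (stackObjs frames ++ others)) := hpre.env.live
  have hobr := hbits.OBR
  simp only [voff] at hobr
  have hsp := hpre.shadow.rsp
  have hwhere := hpre.where_obj
  rw [hf] at hwhere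
  have hfa : (addr f).toNat = f := toNat_addr f (by omega)
  have hobj : LiveIn others frames f Off.sizeof.stb_vorbis := hf ▸ hpre.env.obj
  -- the callees' contracts, instantiated (the walker finds only hypotheses whose type is literally `Calls …`)
  have hsp' := h_sp others frames Blk len
  have hget8 := h_get8 others frames Blk len
  have herror := h_error others frames
  have hspnc := h_spnc others frames Blk len
  -- the precondition of a reader called from this frame (rsp = u.rsp − 32 at its entry)
  have mkpre : ∀ v : State, ShadowUntouched u.mem v.mem → v.reg .rsp = u.reg .rsp - 32 → v.reg .rdi = addr f →
      Bits Blk len v.mem f → Vorbis.Spec.ReaderPre others frames Blk len v := by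
    intro v hunv hrsp hrdi hb
    refine hpre.again (hpre.shadow.call hunv (by u_omega) (by u_omega) (by u_omega)) (hrdi.trans hr.symm) ?_
    rw [hf]
    exact hb
  have hexit := Vorbis.Spec.Worked.maybe_start_packet.exit_join_w Lay hLay μ hμ u₀ hcode hload4 h_sp h_get8 h_error h_spnc hload1 hstore4 hstore1
      others frames Blk len u ret he0 hpre f hf
  have hz2 : s_112f68r.reg .rax = z2 := w_rax
  u_walk hcode [hμ.vendor] until [Vorbis.L.maybe_start_packet.cut1, Vorbis.L.maybe_start_packet.join1] span [Vorbis.L.textLo, Vorbis.L.textHi] side (v_side)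
  case call_inv =>
    refine Vorbis.abiInv_of ?_ ?_
    · rw [w_flags]
      first
      | exact hdf_112f68r
      | (simp only [X86.User.df_setStatus]; exact hdf_112f68r)
    · rw [w_mxcsr]
      exact hmx_112f68r
  case pre_112f83 =>
    have hun' : ShadowUntouched u.mem s_112f83.mem := by v_untouched
    have hw : Mem.SameExcept [⟨(u.reg .rsp).toNat - 240, (u.reg .rsp).toNat⟩] s_112f68r.mem s_112f83.mem := by
      rw [w_mem]
      u_same
    have hk := Vorbis.Spec.Reader.reader_of_window hb_112f68r hw (by u_omega)
    exact mkpre _ hun' w_rsp w_rdi hk.1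
  case call_inv =>
    refine Vorbis.abiInv_of ?_ ?_
    · rw [w_flags]
      first
      | exact hdf_112f68r
      | (simp only [X86.User.df_setStatus]; exact hdf_112f68r)
    · rw [w_mxcsr]
      exact hmx_112f68r
  case pre_112f79 =>
    have hun' : ShadowUntouched u.mem s_112f79.mem := by v_untouched
    refine ⟨hpre.shadow.call hun' (by u_omega) (by u_omega) (by u_omega), ?_⟩
    rw [w_rdi, hfa]
    exact hobj
  · -- the byte matched: the next call returned
    have hne2 : z2 ≠ 0 := by
      intro h
      rw [h] at hbr_112f6f
      exact absurd hbr_112f6f (by decide)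
    have hadv2 := hadv hne2
    have hp := w_post
    have c_rdi := w_rdi_112f83
    have c_rsp := w_rsp_112f83
    have hpost : Vorbis.Spec.Get8Post Blk len (s_112f83.reg .rdi).toNat s_112f83 s_112f83r := hp
    have w_eq := Vorbis.conv_code_eqOn w_code
    simp only [X86.User.Spec.footprint, vspec, c_rsp, c_rdi, hfa] at w_same
    have hw_112f83 : Mem.SameExcept [⟨(u.reg .rsp).toNat - 240, (u.reg .rsp).toNat⟩] s_112f68r.mem s_112f83.mem := by
      rw [w_mem_112f83]
      u_same
    have hk_112f83 := Vorbis.Spec.Reader.reader_of_window hb_112f68r hw_112f83 (by u_omega)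
    rw [w_mem_112f83] at w_same
    have hs0_112f83r : UInt64.ofNat (s_112f83r.mem.readLE (u.reg .rsp) 8) = ret := by u_frame hs0_112f68r
    have hs1_112f83r : UInt64.ofNat (s_112f83r.mem.readLE (u.reg .rsp - 8) 8) = u.reg .rbp := by u_frame hs1_112f68r
    have hs2_112f83r : UInt64.ofNat (s_112f83r.mem.readLE (u.reg .rsp - 16) 8) = u.reg .rbx := by u_frame hs2_112f68r
    have hun_112f83r : ShadowUntouched u.mem s_112f83r.mem := by v_untouched
    rw [← w_mem_112f83] at w_same
    have hv_112f83 : Mem.SameExcept [⟨(u.reg .rsp).toNat - 240, (u.reg .rsp).toNat⟩, ⟨f + 48, f + 56⟩, ⟨f + 136, f + 144⟩]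
        u.mem s_112f83.mem := by
      rw [w_mem_112f83]
      u_same
    have hsame_112f83r := Vorbis.Spec.Reader.sameExcept_through_callee hv_112f83 w_same (by
      simp only [List.forall_mem_cons, List.not_mem_nil, false_imp_iff, implies_true, and_true, X86.User.inSpans_cons,
        X86.User.inSpans_nil, or_false]
      repeat' apply And.intro
      all_goals u_omega)
    have hdf_112f83r : s_112f83r.flags.get .df = false := (show X86.User.abiInv _ from w_inv).1
    have hmx_112f83r : s_112f83r.mxcsr &&& 8064 = 8064 := (show X86.User.abiInv _ from w_inv).2
    clear w_same hv_112f83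
    rw [c_rdi, hfa] at hpost
    have hg_112f83 := hpost
    clear hpost hp
    obtain ⟨z3, w_rax⟩ : ∃ z : Word, s_112f83r.reg .rax = z := ⟨_, rfl⟩
    have hz3 : s_112f83r.reg .rax = z3 := w_rax
    have hb_112f83r : Bits Blk len s_112f83r.mem f := hg_112f83.reader.bits
    have hmu_112f83r : mu s_112f83r.mem f ≤ mu u.mem f := by
      have := hg_112f83.reader.mu_le
      rw [hk_112f83.2] at this
      omega
    have hadv_next : z3 ≠ 0 → mu s_112f83r.mem f + 65536 * 3 ≤ mu u.mem f := by
      intro hne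
      have h := (hg_112f83.adv (by rw [hz3]; exact hne)).2
      rw [hk_112f83.2] at h
      omega
    exact Vorbis.Spec.Worked.maybe_start_packet.after_get8_3_w Lay hLay μ hμ u₀ hcode hload4 h_sp h_get8 h_error h_spnc hload1 hstore4 hstore1
      others frames Blk len u ret he0 hpre f hf
      s_112f83r z3 w_rip w_rsp w_rbx (w_kept.mono_all (by rfl)) w_eq
      hs0_112f83r hs1_112f83r hs2_112f83r hun_112f83r hsame_112f83r hdf_112f83r hmx_112f83r hb_112f83r hmu_112f83r w_rax hns hadv_next
  · -- the byte did not match: error(f, 30) returned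
    have hp := w_post
    have c_rdi := w_rdi_112f79
    have c_rsp := w_rsp_112f79
    have hpost := hp
    have w_eq := Vorbis.conv_code_eqOn w_code
    simp only [X86.User.Spec.footprint, vspec, c_rsp, c_rdi, hfa] at w_same
    have hw_112f79 : Mem.SameExcept [⟨(u.reg .rsp).toNat - 240, (u.reg .rsp).toNat⟩] s_112f68r.mem s_112f79.mem := by
      rw [w_mem_112f79]
      u_same
    have hk_112f79 := Vorbis.Spec.Reader.reader_of_window hb_112f68r hw_112f79 (by u_omega)
    have hke_112f79 := Vorbis.Spec.MaybeStart.reader_through_error hk_112f79.1 w_same (by u_omega)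
    rw [w_mem_112f79] at w_same
    have hs0_112f79r : UInt64.ofNat (s_112f79r.mem.readLE (u.reg .rsp) 8) = ret := by u_frame hs0_112f68r
    have hs1_112f79r : UInt64.ofNat (s_112f79r.mem.readLE (u.reg .rsp - 8) 8) = u.reg .rbp := by u_frame hs1_112f68r
    have hs2_112f79r : UInt64.ofNat (s_112f79r.mem.readLE (u.reg .rsp - 16) 8) = u.reg .rbx := by u_frame hs2_112f68r
    have hun_112f79r : ShadowUntouched u.mem s_112f79r.mem := by v_untouched
    rw [← w_mem_112f79] at w_same
    have hv_112f79 : Mem.SameExcept [⟨(u.reg .rsp).toNat - 240, (u.reg .rsp).toNat⟩, ⟨f + 48, f + 56⟩, ⟨f + 136, f + 144⟩]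
        u.mem s_112f79.mem := by
      rw [w_mem_112f79]
      u_same
    have hsame_112f79r := Vorbis.Spec.Reader.sameExcept_through_callee hv_112f79 w_same (by
      simp only [List.forall_mem_cons, List.not_mem_nil, false_imp_iff, implies_true, and_true, X86.User.inSpans_cons,
        X86.User.inSpans_nil, or_false]
      repeat' apply And.intro
      all_goals u_omega)
    have hdf_112f79r : s_112f79r.flags.get .df = false := (show X86.User.abiInv _ from w_inv).1
    have hmx_112f79r : s_112f79r.mxcsr &&& 8064 = 8064 := (show X86.User.abiInv _ from w_inv).2
    clear w_same hv_112f79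
    have w_rax : s_112f79r.reg .rax = 0 := hpost.1
    have hb_112f79r : Bits Blk len s_112f79r.mem f := hke_112f79.1
    have hmu_112f79r : mu s_112f79r.mem f ≤ mu u.mem f := by
      rw [hke_112f79.2, hk_112f79.2]
      exact hmu_112f68r
    u_walk hcode [hμ.vendor] until [Vorbis.L.maybe_start_packet.cut1, Vorbis.L.maybe_start_packet.join1] span [Vorbis.L.textLo, Vorbis.L.textHi] side (v_side)
    have hsame_112f7e : Mem.SameExcept [⟨(u.reg .rsp).toNat - 240, (u.reg .rsp).toNat⟩, ⟨f + 48, f + 56⟩, ⟨f + 136, f + 144⟩]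
        u.mem s_112f7e.mem := by
      rw [w_mem]
      u_same
    have hw_112f7e : Mem.SameExcept [⟨(u.reg .rsp).toNat - 240, (u.reg .rsp).toNat⟩] s_112f79r.mem s_112f7e.mem := by
      rw [w_mem]
      u_same
    have hk_112f7e := Vorbis.Spec.Reader.reader_of_window hb_112f79r hw_112f7e (by u_omega)
    have hun_112f7e : ShadowUntouched u.mem s_112f7e.mem := by v_untouched
    have hs0_112f7e : UInt64.ofNat (s_112f7e.mem.readLE (u.reg .rsp) 8) = ret := by u_frame hs0_112f79r
    have hs1_112f7e : UInt64.ofNat (s_112f7e.mem.readLE (u.reg .rsp - 8) 8) = u.reg .rbp := by u_frame hs1_112f79r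
    have hs2_112f7e : UInt64.ofNat (s_112f7e.mem.readLE (u.reg .rsp - 16) 8) = u.reg .rbx := by u_frame hs2_112f79r
    have hdf_112f7e : s_112f7e.flags.get .df = false := by
      rw [w_flags]
      first
        | exact hdf_112f79r
        | (simp only [X86.User.df_setStatus]; exact hdf_112f79r)
    have hmx_112f7e : s_112f7e.mxcsr &&& 8064 = 8064 := by
      rw [w_mxcsr]
      exact hmx_112f79r
    have hmu_112f7e : mu s_112f7e.mem f ≤ mu u.mem f := by
      rw [hk_112f7e.2]
      exact hmu_112f79r
    refine hexit s_112f7e w_rip w_rsp (w_kept.mono_all (by rfl)) (Vorbis.Spec.MaybeStart.widen hsame_112f7e) hun_112f7e hs0_112f7e hs1_112f7e hs2_112f7e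
      hdf_112f7e hmx_112f7e w_eq ⟨hun_112f7e, ⟨hk_112f7e.1, hmu_112f7e⟩, ?_, ?_⟩
    · exact Or.inl w_rax
    · intro h
      rw [w_rax] at h
      exact absurd h (by decide)

/-- From the state the get8 number 1 of the capture pattern returned (`cut2`): the byte does not match → `error(f, 30)`, exit;
it matches → the next callee, whose returned state is handed to `after_get8_2_w`. `hadv`: a non-zero byte was really read, so μ is
1 × 65536 below the entry's. -/
theorem after_get8_1_w
    (Lay : Layout) (hLay : Lay.hi = 0x1000000) (μ : Microarch) (hμ : UserX.MicroOK μ) (u₀ : State)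
    (hcode : HasCodeNat Lay u₀ Vorbis.L.maybe_start_packet.entry Vorbis.Code.code_maybe_start_packet.nat Vorbis.L.maybe_start_packet.size)
    (hload4 : Asan.SmallCheck Lay μ Vorbis.WayInv (Vorbis.CodeOK u₀) [.rax, .rcx, .rdx] 4 Vorbis.L.__asan_load4_noabort.entry)
    (h_sp : ∀ (others : List Obj) (frames : List (Nat × FrameLayout)) (Blk : Block → Prop) (len : Nat),
      Calls Lay μ Vorbis.WayInv (Vorbis.conv u₀) Vorbis.L.start_packet.entry (Vorbis.Spec.start_packet.spec others frames Blk len))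
    (h_get8 : ∀ (others : List Obj) (frames : List (Nat × FrameLayout)) (Blk : Block → Prop) (len : Nat),
      Calls Lay μ Vorbis.WayInv (Vorbis.conv u₀) Vorbis.L.get8.entry (Vorbis.Spec.get8.spec others frames Blk len))
    (h_error : ∀ (others : List Obj) (frames : List (Nat × FrameLayout)),
      Calls Lay μ Vorbis.WayInv (Vorbis.conv u₀) Vorbis.L.error.entry (Vorbis.Spec.error.spec others frames))
    (h_spnc : ∀ (others : List Obj) (frames : List (Nat × FrameLayout)) (Blk : Block → Prop) (len : Nat),
      Calls Lay μ Vorbis.WayInv (Vorbis.conv u₀) Vorbis.L.start_page_no_capturepattern.entry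
        (Vorbis.Spec.start_page_no_capturepattern.spec others frames Blk len))
    (hload1 : Asan.SmallCheck Lay μ Vorbis.WayInv (Vorbis.CodeOK u₀) [.rax, .rdx] 1 Vorbis.L.__asan_load1_noabort.entry)
    (hstore4 : Asan.SmallCheck Lay μ Vorbis.WayInv (Vorbis.CodeOK u₀) [.rax, .rcx, .rdx] 4 Vorbis.L.__asan_store4_noabort.entry)
    (hstore1 : Asan.SmallCheck Lay μ Vorbis.WayInv (Vorbis.CodeOK u₀) [.rax, .rdx] 1 Vorbis.L.__asan_store1_noabort.entry)
    (others : List Obj) (frames : List (Nat × FrameLayout)) (Blk : Block → Prop) (len : Nat) (u : State) (ret : Word)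
    (he : AtEntry (Vorbis.conv u₀) Vorbis.L.maybe_start_packet.entry (Vorbis.Spec.maybe_start_packet.spec others frames Blk len).frame ret u)
    (hpre : (Vorbis.Spec.maybe_start_packet.spec others frames Blk len).pre u)
    (f : Nat) (hf : (u.reg .rdi).toNat = f)
    (s_112f30r : State) (z1 : Word)
    (w_rip : s_112f30r.rip = Vorbis.L.maybe_start_packet.cut2) (w_rsp : s_112f30r.reg .rsp = u.reg .rsp - 24)
    (w_rbx : s_112f30r.reg .rbx = addr f)
    (w_kept : RegsKept [.rdi, .rbx, .rbp, .rsp, .rax, .rcx, .rdx, .rsi, .r8, .r9, .r10, .r11,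
        .r16, .r17, .r18, .r19, .r20, .r21, .r22, .r23, .r24, .r25, .r26, .r27, .r28, .r29, .r30, .r31] u s_112f30r)
    (w_eq : Mem.EqOn Vorbis.L.textLo Vorbis.L.textHi u₀.mem s_112f30r.mem)
    (hs0_112f30r : UInt64.ofNat (s_112f30r.mem.readLE (u.reg .rsp) 8) = ret)
    (hs1_112f30r : UInt64.ofNat (s_112f30r.mem.readLE (u.reg .rsp - 8) 8) = u.reg .rbp)
    (hs2_112f30r : UInt64.ofNat (s_112f30r.mem.readLE (u.reg .rsp - 16) 8) = u.reg .rbx)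
    (hun_112f30r : ShadowUntouched u.mem s_112f30r.mem)
    (hsame_112f30r : Mem.SameExcept [⟨(u.reg .rsp).toNat - 240, (u.reg .rsp).toNat⟩, ⟨f + 48, f + 56⟩, ⟨f + 136, f + 144⟩]
        u.mem s_112f30r.mem)
    (hdf_112f30r : s_112f30r.flags.get .df = false) (hmx_112f30r : s_112f30r.mxcsr &&& 8064 = 8064)
    (hb_112f30r : Bits Blk len s_112f30r.mem f) (hmu_112f30r : mu s_112f30r.mem f ≤ mu u.mem f)
    (w_rax : s_112f30r.reg .rax = z1)
    (hns : stb_vorbis.next_seg u.mem f = -1)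
    (hadv : z1 ≠ 0 → mu s_112f30r.mem f + 65536 * 1 ≤ mu u.mem f)
    : ReachVia Lay μ WayInv s_112f30r (Returned (conv u₀) (Vorbis.Spec.maybe_start_packet.spec others frames Blk len) u ret) := by
  have he0 := he
  v_entry he
  have hr : u.reg .rdi = addr f := eq_addr _ _ hf
  have hbits : Bits Blk len u.mem f := hf ▸ hpre.bits
  have hL : BlkLive Blk (Live (stackObjs frames ++ others)) := hpre.env.live
  have hobr := hbits.OBR
  simp only [voff] at hobr
  have hsp := hpre.shadow.rsp
  have hwhere := hpre.where_obj
  rw [hf] at hwhere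
  have hfa : (addr f).toNat = f := toNat_addr f (by omega)
  have hobj : LiveIn others frames f Off.sizeof.stb_vorbis := hf ▸ hpre.env.obj
  -- the callees' contracts, instantiated (the walker finds only hypotheses whose type is literally `Calls …`)
  have hsp' := h_sp others frames Blk len
  have hget8 := h_get8 others frames Blk len
  have herror := h_error others frames
  have hspnc := h_spnc others frames Blk len
  -- the precondition of a reader called from this frame (rsp = u.rsp − 32 at its entry)
  have mkpre : ∀ v : State, ShadowUntouched u.mem v.mem → v.reg .rsp = u.reg .rsp - 32 → v.reg .rdi = addr f →
      Bits Blk len v.mem f → Vorbis.Spec.ReaderPre others frames Blk len v := by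
    intro v hunv hrsp hrdi hb
    refine hpre.again (hpre.shadow.call hunv (by u_omega) (by u_omega) (by u_omega)) (hrdi.trans hr.symm) ?_
    rw [hf]
    exact hb
  have hexit := Vorbis.Spec.Worked.maybe_start_packet.exit_join_w Lay hLay μ hμ u₀ hcode hload4 h_sp h_get8 h_error h_spnc hload1 hstore4 hstore1
      others frames Blk len u ret he0 hpre f hf
  have hz1 : s_112f30r.reg .rax = z1 := w_rax
  u_walk hcode [hμ.vendor] until [Vorbis.L.maybe_start_packet.cut1, Vorbis.L.maybe_start_packet.join1] span [Vorbis.L.textLo, Vorbis.L.textHi] side (v_side)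
  case check_112f3e =>
    have hun : ShadowUntouched u.mem s_112f3e.mem := by v_untouched
    exact Vorbis.Spec.check_site hpre.shadow.inv hun (hbits.site_field hL 136 4 (by omega) (by omega) rfl) (by u_omega)
  case call_inv =>
    refine Vorbis.abiInv_of ?_ ?_
    · rw [w_flags]
      first
      | exact w_df_112f3e
      | (simp only [X86.User.df_setStatus]; exact w_df_112f3e)
    · rw [w_mxcsr]
      exact hmx_112f30r
  case pre_112f68 =>
    have hun' : ShadowUntouched u.mem s_112f68.mem := by v_untouched
    have hw : Mem.SameExcept [⟨(u.reg .rsp).toNat - 240, (u.reg .rsp).toNat⟩] s_112f30r.mem s_112f68.mem := by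
      rw [w_mem]
      u_same
    have hk := Vorbis.Spec.Reader.reader_of_window hb_112f30r hw (by u_omega)
    exact mkpre _ hun' w_rsp w_rdi hk.1
  case call_inv =>
    refine Vorbis.abiInv_of ?_ ?_
    · rw [w_flags]
      first
      | exact w_df_112f3e
      | (simp only [X86.User.df_setStatus]; exact w_df_112f3e)
    · rw [w_mxcsr]
      exact hmx_112f30r
  case pre_112f5e =>
    have hun' : ShadowUntouched u.mem s_112f5e.mem := by v_untouched
    refine ⟨hpre.shadow.call hun' (by u_omega) (by u_omega) (by u_omega), ?_⟩
    rw [w_rdi, hfa]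
    exact hobj
  · -- 0x113022: eof is set, return 0
    have hsame_113022 : Mem.SameExcept [⟨(u.reg .rsp).toNat - 240, (u.reg .rsp).toNat⟩, ⟨f + 48, f + 56⟩, ⟨f + 136, f + 144⟩]
        u.mem s_113022.mem := by
      rw [w_mem]
      u_same
    have hw_113022 : Mem.SameExcept [⟨(u.reg .rsp).toNat - 240, (u.reg .rsp).toNat⟩] s_112f30r.mem s_113022.mem := by
      rw [w_mem]
      u_same
    have hk_113022 := Vorbis.Spec.Reader.reader_of_window hb_112f30r hw_113022 (by u_omega)
    have hun_113022 : ShadowUntouched u.mem s_113022.mem := by v_untouched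
    have hs0_113022 : UInt64.ofNat (s_113022.mem.readLE (u.reg .rsp) 8) = ret := by u_frame hs0_112f30r
    have hs1_113022 : UInt64.ofNat (s_113022.mem.readLE (u.reg .rsp - 8) 8) = u.reg .rbp := by u_frame hs1_112f30r
    have hs2_113022 : UInt64.ofNat (s_113022.mem.readLE (u.reg .rsp - 16) 8) = u.reg .rbx := by u_frame hs2_112f30r
    have hdf_113022 : s_113022.flags.get .df = false := by
      rw [w_flags]
      first
        | exact w_df_112f3e
        | (simp only [X86.User.df_setStatus]; exact w_df_112f3e)
    have hmx_113022 : s_113022.mxcsr &&& 8064 = 8064 := by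
      rw [w_mxcsr]
      exact hmx_112f30r
    have hmu_113022 : mu s_113022.mem f ≤ mu u.mem f := by
      rw [hk_113022.2]
      exact hmu_112f30r
    refine hexit s_113022 w_rip w_rsp (w_kept.mono_all (by rfl)) (Vorbis.Spec.MaybeStart.widen hsame_113022) hun_113022 hs0_113022 hs1_113022 hs2_113022
      hdf_113022 hmx_113022 w_eq ⟨hun_113022, ⟨hk_113022.1, hmu_113022⟩, ?_, ?_⟩
    · exact Or.inl (by rw [w_rax]; rfl)
    · intro h
      rw [w_rax] at h
      exact absurd h (by decide)
  · -- the byte matched: the next call returned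
    have hne1 : z1 ≠ 0 := by
      intro h
      rw [h] at hbr_112f54
      exact absurd hbr_112f54 (by decide)
    have hadv1 := hadv hne1
    have hp := w_post
    have c_rdi := w_rdi_112f68
    have c_rsp := w_rsp_112f68
    have hpost : Vorbis.Spec.Get8Post Blk len (s_112f68.reg .rdi).toNat s_112f68 s_112f68r := hp
    have w_eq := Vorbis.conv_code_eqOn w_code
    simp only [X86.User.Spec.footprint, vspec, c_rsp, c_rdi, hfa] at w_same
    have hw_112f68 : Mem.SameExcept [⟨(u.reg .rsp).toNat - 240, (u.reg .rsp).toNat⟩] s_112f30r.mem s_112f68.mem := by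
      rw [w_mem_112f68]
      u_same
    have hk_112f68 := Vorbis.Spec.Reader.reader_of_window hb_112f30r hw_112f68 (by u_omega)
    rw [w_mem_112f68] at w_same
    have hs0_112f68r : UInt64.ofNat (s_112f68r.mem.readLE (u.reg .rsp) 8) = ret := by u_frame hs0_112f30r
    have hs1_112f68r : UInt64.ofNat (s_112f68r.mem.readLE (u.reg .rsp - 8) 8) = u.reg .rbp := by u_frame hs1_112f30r
    have hs2_112f68r : UInt64.ofNat (s_112f68r.mem.readLE (u.reg .rsp - 16) 8) = u.reg .rbx := by u_frame hs2_112f30r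
    have hun_112f68r : ShadowUntouched u.mem s_112f68r.mem := by v_untouched
    rw [← w_mem_112f68] at w_same
    have hv_112f68 : Mem.SameExcept [⟨(u.reg .rsp).toNat - 240, (u.reg .rsp).toNat⟩, ⟨f + 48, f + 56⟩, ⟨f + 136, f + 144⟩]
        u.mem s_112f68.mem := by
      rw [w_mem_112f68]
      u_same
    have hsame_112f68r := Vorbis.Spec.Reader.sameExcept_through_callee hv_112f68 w_same (by
      simp only [List.forall_mem_cons, List.not_mem_nil, false_imp_iff, implies_true, and_true, X86.User.inSpans_cons,
        X86.User.inSpans_nil, or_false]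
      repeat' apply And.intro
      all_goals u_omega)
    have hdf_112f68r : s_112f68r.flags.get .df = false := (show X86.User.abiInv _ from w_inv).1
    have hmx_112f68r : s_112f68r.mxcsr &&& 8064 = 8064 := (show X86.User.abiInv _ from w_inv).2
    clear w_same hv_112f68
    rw [c_rdi, hfa] at hpost
    have hg_112f68 := hpost
    clear hpost hp
    obtain ⟨z2, w_rax⟩ : ∃ z : Word, s_112f68r.reg .rax = z := ⟨_, rfl⟩
    have hz2 : s_112f68r.reg .rax = z2 := w_rax
    have hb_112f68r : Bits Blk len s_112f68r.mem f := hg_112f68.reader.bits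
    have hmu_112f68r : mu s_112f68r.mem f ≤ mu u.mem f := by
      have := hg_112f68.reader.mu_le
      rw [hk_112f68.2] at this
      omega
    have hadv_next : z2 ≠ 0 → mu s_112f68r.mem f + 65536 * 2 ≤ mu u.mem f := by
      intro hne
      have h := (hg_112f68.adv (by rw [hz2]; exact hne)).2
      rw [hk_112f68.2] at h
      omega
    exact Vorbis.Spec.Worked.maybe_start_packet.after_get8_2_w Lay hLay μ hμ u₀ hcode hload4 h_sp h_get8 h_error h_spnc hload1 hstore4 hstore1
      others frames Blk len u ret he0 hpre f hf
      s_112f68r z2 w_rip w_rsp w_rbx (w_kept.mono_all (by rfl)) w_eq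
      hs0_112f68r hs1_112f68r hs2_112f68r hun_112f68r hsame_112f68r hdf_112f68r hmx_112f68r hb_112f68r hmu_112f68r w_rax hns hadv_next
  · -- the byte did not match: error(f, 30) returned
    have hp := w_post
    have c_rdi := w_rdi_112f5e
    have c_rsp := w_rsp_112f5e
    have hpost := hp
    have w_eq := Vorbis.conv_code_eqOn w_code
    simp only [X86.User.Spec.footprint, vspec, c_rsp, c_rdi, hfa] at w_same
    have hw_112f5e : Mem.SameExcept [⟨(u.reg .rsp).toNat - 240, (u.reg .rsp).toNat⟩] s_112f30r.mem s_112f5e.mem := by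
      rw [w_mem_112f5e]
      u_same
    have hk_112f5e := Vorbis.Spec.Reader.reader_of_window hb_112f30r hw_112f5e (by u_omega)
    have hke_112f5e := Vorbis.Spec.MaybeStart.reader_through_error hk_112f5e.1 w_same (by u_omega)
    rw [w_mem_112f5e] at w_same
    have hs0_112f5er : UInt64.ofNat (s_112f5er.mem.readLE (u.reg .rsp) 8) = ret := by u_frame hs0_112f30r
    have hs1_112f5er : UInt64.ofNat (s_112f5er.mem.readLE (u.reg .rsp - 8) 8) = u.reg .rbp := by u_frame hs1_112f30r
    have hs2_112f5er : UInt64.ofNat (s_112f5er.mem.readLE (u.reg .rsp - 16) 8) = u.reg .rbx := by u_frame hs2_112f30r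
    have hun_112f5er : ShadowUntouched u.mem s_112f5er.mem := by v_untouched
    rw [← w_mem_112f5e] at w_same
    have hv_112f5e : Mem.SameExcept [⟨(u.reg .rsp).toNat - 240, (u.reg .rsp).toNat⟩, ⟨f + 48, f + 56⟩, ⟨f + 136, f + 144⟩]
        u.mem s_112f5e.mem := by
      rw [w_mem_112f5e]
      u_same
    have hsame_112f5er := Vorbis.Spec.Reader.sameExcept_through_callee hv_112f5e w_same (by
      simp only [List.forall_mem_cons, List.not_mem_nil, false_imp_iff, implies_true, and_true, X86.User.inSpans_cons,
        X86.User.inSpans_nil, or_false]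
      repeat' apply And.intro
      all_goals u_omega)
    have hdf_112f5er : s_112f5er.flags.get .df = false := (show X86.User.abiInv _ from w_inv).1
    have hmx_112f5er : s_112f5er.mxcsr &&& 8064 = 8064 := (show X86.User.abiInv _ from w_inv).2
    clear w_same hv_112f5e
    have w_rax : s_112f5er.reg .rax = 0 := hpost.1
    have hb_112f5er : Bits Blk len s_112f5er.mem f := hke_112f5e.1
    have hmu_112f5er : mu s_112f5er.mem f ≤ mu u.mem f := by
      rw [hke_112f5e.2, hk_112f5e.2]
      exact hmu_112f30r
    u_walk hcode [hμ.vendor] until [Vorbis.L.maybe_start_packet.cut1, Vorbis.L.maybe_start_packet.join1] span [Vorbis.L.textLo, Vorbis.L.textHi] side (v_side)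
    have hsame_112f63 : Mem.SameExcept [⟨(u.reg .rsp).toNat - 240, (u.reg .rsp).toNat⟩, ⟨f + 48, f + 56⟩, ⟨f + 136, f + 144⟩]
        u.mem s_112f63.mem := by
      rw [w_mem]
      u_same
    have hw_112f63 : Mem.SameExcept [⟨(u.reg .rsp).toNat - 240, (u.reg .rsp).toNat⟩] s_112f5er.mem s_112f63.mem := by
      rw [w_mem]
      u_same
    have hk_112f63 := Vorbis.Spec.Reader.reader_of_window hb_112f5er hw_112f63 (by u_omega)
    have hun_112f63 : ShadowUntouched u.mem s_112f63.mem := by v_untouched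
    have hs0_112f63 : UInt64.ofNat (s_112f63.mem.readLE (u.reg .rsp) 8) = ret := by u_frame hs0_112f5er
    have hs1_112f63 : UInt64.ofNat (s_112f63.mem.readLE (u.reg .rsp - 8) 8) = u.reg .rbp := by u_frame hs1_112f5er
    have hs2_112f63 : UInt64.ofNat (s_112f63.mem.readLE (u.reg .rsp - 16) 8) = u.reg .rbx := by u_frame hs2_112f5er
    have hdf_112f63 : s_112f63.flags.get .df = false := by
      rw [w_flags]
      first
        | exact hdf_112f5er
        | (simp only [X86.User.df_setStatus]; exact hdf_112f5er)
    have hmx_112f63 : s_112f63.mxcsr &&& 8064 = 8064 := by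
      rw [w_mxcsr]
      exact hmx_112f5er
    have hmu_112f63 : mu s_112f63.mem f ≤ mu u.mem f := by
      rw [hk_112f63.2]
      exact hmu_112f5er
    refine hexit s_112f63 w_rip w_rsp (w_kept.mono_all (by rfl)) (Vorbis.Spec.MaybeStart.widen hsame_112f63) hun_112f63 hs0_112f63 hs1_112f63 hs2_112f63
      hdf_112f63 hmx_112f63 w_eq ⟨hun_112f63, ⟨hk_112f63.1, hmu_112f63⟩, ?_, ?_⟩
    · exact Or.inl w_rax
    · intro h
      rw [w_rax] at h
      exact absurd h (by decide)

end Vorbis.Spec.Worked.maybe_start_packet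

/-- `maybe_start_packet(f)` satisfies its contract. `next_seg ≠ −1`: straight to `start_packet` (`start_join_w`). Else the capture
pattern `OggS` byte by byte (four get8, each with its `error(f, 30)` arm), `start_page_no_capturepattern`, the continued-flag test:
one lemma per returned callee state (`after_get8_1_w … after_get8_4_w`, `after_spnc_w`), so that no
declaration walks more than three calls (ONE declaration for the whole function needs 40M heartbeats and > 60 GB). -/
theorem Vorbis.Spec.Worked.maybe_start_packet_ok : Vorbis.Spec.maybe_start_packet.Statement := by
  intro Lay hLay μ hμ u₀ hcode hload4 h_sp h_get8 h_error h_spnc hload1 hstore4 hstore1 others frames Blk len u ret he hpre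
  have he0 := he
  v_entry he
  obtain ⟨f, hf⟩ : ∃ f : Nat, (u.reg .rdi).toNat = f := ⟨_, rfl⟩
  have hr : u.reg .rdi = addr f := eq_addr _ _ hf
  have hbits : Bits Blk len u.mem f := hf ▸ hpre.bits
  have hL : BlkLive Blk (Live (stackObjs frames ++ others)) := hpre.env.live
  have hobr := hbits.OBR
  simp only [voff] at hobr
  have hsp := hpre.shadow.rsp
  have hwhere := hpre.where_obj
  rw [hf] at hwhere
  have hfa : (addr f).toNat = f := toNat_addr f (by omega)
  have hobj : LiveIn others frames f Off.sizeof.stb_vorbis := hf ▸ hpre.env.obj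
  -- the callees' contracts, instantiated (the walker finds only hypotheses whose type is literally `Calls …`)
  have hsp' := h_sp others frames Blk len
  have hget8 := h_get8 others frames Blk len
  have herror := h_error others frames
  have hspnc := h_spnc others frames Blk len
  -- the precondition of a reader called from this frame (rsp = u.rsp − 32 at its entry)
  have mkpre : ∀ v : State, ShadowUntouched u.mem v.mem → v.reg .rsp = u.reg .rsp - 32 → v.reg .rdi = addr f →
      Bits Blk len v.mem f → Vorbis.Spec.ReaderPre others frames Blk len v := by
    intro v hunv hrsp hrdi hb
    refine hpre.again (hpre.shadow.call hunv (by u_omega) (by u_omega) (by u_omega)) (hrdi.trans hr.symm) ?_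
    rw [hf]
    exact hb
  have hstart := Vorbis.Spec.Worked.maybe_start_packet.start_join_w Lay hLay μ hμ u₀ hcode hload4 h_sp h_get8 h_error h_spnc hload1 hstore4 hstore1
      others frames Blk len u ret he0 hpre f hf
  have r1752 : u.mem.readLE (addr f + 1752) 4 = u.mem.u32 (f + 1752) := by simp only [vfield]
  u_walk hcode [hμ.vendor] until [Vorbis.L.maybe_start_packet.cut1, Vorbis.L.maybe_start_packet.join1] span [Vorbis.L.textLo, Vorbis.L.textHi] side (v_side)
  case check_112f10 =>
    have hun : ShadowUntouched u.mem s_112f10.mem := by v_untouched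
    exact Vorbis.Spec.check_site hpre.shadow.inv hun (hbits.site_field hL 1752 4 (by omega) (by omega) rfl) (by u_omega)
  case call_inv =>
    refine Vorbis.abiInv_of ?_ ?_
    · rw [w_flags]
      simp only [X86.User.df_setStatus]
      exact w_df_112f10
    · rw [w_mxcsr]
      exact he_mx
  case pre_112f30 =>
    have hun' : ShadowUntouched u.mem s_112f30.mem := by v_untouched
    have hw : Mem.SameExcept [⟨(u.reg .rsp).toNat - 240, (u.reg .rsp).toNat⟩] u.mem s_112f30.mem := by
      rw [w_mem]
      u_same
    have hk := Vorbis.Spec.Reader.reader_of_window hbits hw (by u_omega)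
    exact mkpre _ hun' w_rsp w_rdi hk.1
  · -- 0x112f35: the first get8 returned
    have hp := w_post
    have c_rdi := w_rdi_112f30
    have c_rsp := w_rsp_112f30
    have hpost : Vorbis.Spec.Get8Post Blk len (s_112f30.reg .rdi).toNat s_112f30 s_112f30r := hp
    have w_eq := Vorbis.conv_code_eqOn w_code
    simp only [X86.User.Spec.footprint, vspec, c_rsp, c_rdi, hfa] at w_same
    have hw_112f30 : Mem.SameExcept [⟨(u.reg .rsp).toNat - 240, (u.reg .rsp).toNat⟩] u.mem s_112f30.mem := by
      rw [w_mem_112f30]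
      u_same
    have hk_112f30 := Vorbis.Spec.Reader.reader_of_window hbits hw_112f30 (by u_omega)
    have hq1 : UInt64.ofNat (s_112f30.mem.readLE (u.reg .rsp - 8) 8) = u.reg .rbp := by u_resolve
    have hq2 : UInt64.ofNat (s_112f30.mem.readLE (u.reg .rsp - 16) 8) = u.reg .rbx := by u_resolve
    have hs1_112f30 : UInt64.ofNat (s_112f30r.mem.readLE (u.reg .rsp - 8) 8) = u.reg .rbp := by u_frame hq1
    have hs2_112f30 : UInt64.ofNat (s_112f30r.mem.readLE (u.reg .rsp - 16) 8) = u.reg .rbx := by u_frame hq2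
    clear hq1 hq2
    rw [w_mem_112f30] at w_same
    have hs0_112f30 : UInt64.ofNat (s_112f30r.mem.readLE (u.reg .rsp) 8) = ret := by u_frame he_retAddr
    have hun_112f30 : ShadowUntouched u.mem s_112f30r.mem := by v_untouched
    rw [← w_mem_112f30] at w_same
    have hv_112f30 : Mem.SameExcept [⟨(u.reg .rsp).toNat - 240, (u.reg .rsp).toNat⟩, ⟨f + 48, f + 56⟩, ⟨f + 136, f + 144⟩]
        u.mem s_112f30.mem := by
      rw [w_mem_112f30]
      u_same
    have hsame_112f30 := Vorbis.Spec.Reader.sameExcept_through_callee hv_112f30 w_same (by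
          simp only [List.forall_mem_cons, List.not_mem_nil, false_imp_iff, implies_true, and_true, X86.User.inSpans_cons,
            X86.User.inSpans_nil, or_false]
          repeat' apply And.intro
          all_goals u_omega)
    have hdf_112f30 : s_112f30r.flags.get .df = false := (show X86.User.abiInv _ from w_inv).1
    have hmx_112f30 : s_112f30r.mxcsr &&& 8064 = 8064 := (show X86.User.abiInv _ from w_inv).2
    clear w_same hv_112f30
    rw [c_rdi, hfa] at hpost
    have hg_112f30 := hpost
    clear hpost hp
    obtain ⟨z1, w_rax⟩ : ∃ z : Word, s_112f30r.reg .rax = z := ⟨_, rfl⟩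
    have hz1 : s_112f30r.reg .rax = z1 := w_rax
    have hb_112f30r : Bits Blk len s_112f30r.mem f := hg_112f30.reader.bits
    have hmu_112f30r : mu s_112f30r.mem f ≤ mu u.mem f := by
      have := hg_112f30.reader.mu_le
      rw [hk_112f30.2] at this
      exact this
    have hs0_112f30r := hs0_112f30
    have hs1_112f30r := hs1_112f30
    have hs2_112f30r := hs2_112f30
    have hun_112f30r := hun_112f30
    have hsame_112f30r := hsame_112f30
    have hdf_112f30r := hdf_112f30
    have hmx_112f30r := hmx_112f30
    clear hs0_112f30 hs1_112f30 hs2_112f30 hun_112f30 hsame_112f30 hdf_112f30 hmx_112f30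
    have hns : stb_vorbis.next_seg u.mem f = -1 := by
      have hc := u.mem.i32_cases (f + 1752)
      have hl := u.mem.u32_lt (f + 1752)
      simp only [vacc, voff]
      omega
    have hadv_next : z1 ≠ 0 → mu s_112f30r.mem f + 65536 * 1 ≤ mu u.mem f := by
      intro hne
      have h := (hg_112f30.adv (by rw [hz1]; exact hne)).2
      rw [hk_112f30.2] at h
      omega
    exact Vorbis.Spec.Worked.maybe_start_packet.after_get8_1_w Lay hLay μ hμ u₀ hcode hload4 h_sp h_get8 h_error h_spnc hload1 hstore4 hstore1
      others frames Blk len u ret he0 hpre f hf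
      s_112f30r z1 w_rip w_rsp w_rbx (w_kept.mono_all (by rfl)) w_eq
      hs0_112f30r hs1_112f30r hs2_112f30r hun_112f30r hsame_112f30r hdf_112f30r hmx_112f30r hb_112f30r hmu_112f30r w_rax hns hadv_next
  · -- Vorbis.L.maybe_start_packet.join1: next_seg ≠ −1, the direct start_packet arm
    have hsame : Mem.SameExcept [⟨(u.reg .rsp).toNat - 240, (u.reg .rsp).toNat⟩, ⟨f + 48, f + 56⟩, ⟨f + 136, f + 144⟩]
        u.mem s_112f1c.mem := by
      rw [w_mem]
      u_same
    have hw : Mem.SameExcept [⟨(u.reg .rsp).toNat - 240, (u.reg .rsp).toNat⟩] u.mem s_112f1c.mem := by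
      rw [w_mem]
      u_same
    have hk := Vorbis.Spec.Reader.reader_of_window hbits hw (by u_omega)
    have hun : ShadowUntouched u.mem s_112f1c.mem := by v_untouched
    have hs0 : UInt64.ofNat (s_112f1c.mem.readLE (u.reg .rsp) 8) = ret := by u_resolve
    have hs1 : UInt64.ofNat (s_112f1c.mem.readLE (u.reg .rsp - 8) 8) = u.reg .rbp := by u_resolve
    have hs2 : UInt64.ofNat (s_112f1c.mem.readLE (u.reg .rsp - 16) 8) = u.reg .rbx := by u_resolve
    have hdf : s_112f1c.flags.get .df = false := by
      rw [w_flags]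
      first
        | exact w_df_112f10
        | (simp only [X86.User.df_setStatus]; exact w_df_112f10)
    have hmx : s_112f1c.mxcsr &&& 8064 = 8064 := by
      rw [w_mxcsr]
      exact he_mx
    exact hstart s_112f1c w_rip w_rsp w_rbx (w_kept.mono_all (by rfl)) (Vorbis.Spec.MaybeStart.widen hsame) hun hs0 hs1 hs2
      hdf hmx w_eq ⟨hk.1, Nat.le_of_eq hk.2⟩
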